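-- pv_equiv track=rewrite | github.com/drewhayward/advent-of-code-2021 | day22/cuboid.py | track_cubes
-- ===== SOURCE A (Python) =====
-- from itertools import product, pairwise
--
-- def span_overlap(a, b):
--     return not (a[0] >= b[1] or a[1] <= b[0])
--
-- def get_subspans(a, b):
--     # when finding the cublets of a cube, this finds only the smallest possible
--     # ones which cover the orginal span but don't overlap
--     points = set(filter(lambda x: a[0] <= x <= a[1], a + b))
--     points = sorted(list(points))
--     return pairwise(points)
--
-- def volume(cube):
--     return max(0, cube[1] - cube[0]) * max(0, cube[3] - cube[2]) * max(0, cube[5] - cube[4])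
--
-- def cube_overlaps(cube1, cube2):
--     return all([
--         span_overlap(cube1[:2], cube2[:2]),
--         span_overlap(cube1[2:4], cube2[2:4]),
--         span_overlap(cube1[4:], cube2[4:]),
--     ])
--
-- def fracture_by(cube1, cube2):
--     if not cube_overlaps(cube1, cube2): return [cube1]
--
--     # Find all subcubes that could be created by the other cube
--     xsides = get_subspans(cube1[:2], cube2[:2])
--     ysides = get_subspans(cube1[2:4], cube2[2:4])
--     zsides = get_subspans(cube1[4:], cube2[4:])
--
--     subcubes = set()
--     for xside, yside, zside in product(xsides, ysides, zsides):
--         subcube = (*xside, *yside, *zside)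
--         # if this cube has no volume, skip
--         volume = max(0, xside[1] - xside[0]) * max(0, yside[1] - yside[0]) * max(0, zside[1] - zside[0])
--         if volume == 0: continue
--
--         subcubes.add(subcube)
--
--     return subcubes
--
-- def track_cubes(instructions, filter=False):
--     cubes = set()
--     for is_on, cube in instructions:
--         if filter and not(-50 <= cube[0] <= 50): continue
--
--         if is_on: # add cube
--             to_add = {cube}
--             to_remove = set()
--             for tcube in cubes:
--                 if not cube_overlaps(tcube, cube): continue
--                 pieces = fracture_by(tcube, cube)
--                 to_add.update(pieces.difference(fracture_by(cube, tcube)))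
--                 to_remove.add(tcube)
--
--             cubes.difference_update(to_remove)
--             cubes.update(to_add)
--         else: # subtract cube
--             to_add = set()
--             to_remove = set()
--             for mcube in cubes:
--                 if not cube_overlaps(mcube, cube): continue
--                 to_remove.add(mcube) # remove this larger cube
--
--                 # Nontrivial intersection
--                 fractured = fracture_by(mcube, cube).difference(fracture_by(cube, mcube))
--                 to_add.update(fractured)
--
--             cubes.difference_update(to_remove)
--             cubes.update(to_add)
--
--     return sum(map(volume, cubes))
-- ===== SOURCE B (Python) =====
-- def track_cubes(instructions, filter=False):
--     # signed inclusion-exclusion list: (sign, box); box = (x0,x1,y0,y1,z0,z1), all extents positive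
--     signed = []
--     for is_on, cube in instructions:
--         if filter and not (-50 <= cube[0] <= 50):
--             continue
--         negs = []
--         for s, (a0, a1, b0, b1, c0, c1) in signed:
--             i0, i1 = max(a0, cube[0]), min(a1, cube[1])
--             j0, j1 = max(b0, cube[2]), min(b1, cube[3])
--             k0, k1 = max(c0, cube[4]), min(c1, cube[5])
--             if i0 < i1 and j0 < j1 and k0 < k1:
--                 negs.append((-s, (i0, i1, j0, j1, k0, k1)))
--         signed.extend(negs)
--         if is_on and cube[0] < cube[1] and cube[2] < cube[3] and cube[4] < cube[5]:
--             signed.append((1, (cube[0], cube[1], cube[2], cube[3], cube[4], cube[5])))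
--     return sum(s * (b[1]-b[0]) * (b[3]-b[2]) * (b[5]-b[4]) for s, b in signed)
-- ===== Notes on version B (the rewrite author's own statement) =====
-- stated objective: alternative
-- what changed: A maintains an explicit set of pairwise-disjoint cuboid fragments, re-fracturing every overlapping stored cube against each new cube; B keeps a flat list of signed cuboids (inclusion-exclusion): per instruction it appends one negated intersection per stored entry plus the cube itself when turning on, and returns the signed volume sum, with no fracturing at all.
-- outside the precondition, e.g. on track_cubes([(True, (0, 2, 0, 2, 0, 2, 1))], False): A returns 8, B returns 8
import Mathlib
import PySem

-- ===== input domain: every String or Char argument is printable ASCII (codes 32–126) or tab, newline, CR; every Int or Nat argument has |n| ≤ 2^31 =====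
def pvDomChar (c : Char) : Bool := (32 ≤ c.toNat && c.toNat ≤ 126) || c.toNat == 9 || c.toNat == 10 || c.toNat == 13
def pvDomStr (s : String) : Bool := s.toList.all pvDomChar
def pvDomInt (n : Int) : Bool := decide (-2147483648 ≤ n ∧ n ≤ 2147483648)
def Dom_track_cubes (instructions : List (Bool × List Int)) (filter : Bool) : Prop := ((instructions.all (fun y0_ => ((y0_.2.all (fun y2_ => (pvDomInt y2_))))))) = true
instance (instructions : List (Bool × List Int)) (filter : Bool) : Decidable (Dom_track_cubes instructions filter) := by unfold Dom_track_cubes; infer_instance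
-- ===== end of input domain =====

-- One honest line: B replaces A's exhaustive cube-fracturing bookkeeping by an
-- inclusion-exclusion list of signed cuboids (objective: a structurally different, alternative algorithm).

-- ===== PORT A =====
-- total indexing shim: cube[i]; Pre_ keeps every accessed index in range
def pvGet (xs : List Int) (i : Int) : Int := (PySem.List.pyGet? xs i).getD 0

def span_overlap (a b : List Int) : Bool :=
  !(decide (pvGet a 0 ≥ pvGet b 1) || decide (pvGet a 1 ≤ pvGet b 0))

def get_subspans (a b : List Int) : List (Int × Int) :=
  -- points = set(filter(lambda x: a[0] <= x <= a[1], a + b)); points = sorted(list(points))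
  let points : PySem.Set Int :=
    PySem.Set.ofList ((a ++ b).filter (fun x => decide (pvGet a 0 ≤ x ∧ x ≤ pvGet a 1)))
  let pts := PySem.List.sorted points (fun x => x) false
  -- pairwise(points)
  pts.zip pts.tail

def volume (cube : List Int) : Int :=
  max 0 (pvGet cube 1 - pvGet cube 0) * max 0 (pvGet cube 3 - pvGet cube 2) *
    max 0 (pvGet cube 5 - pvGet cube 4)

def cube_overlaps (cube1 cube2 : List Int) : Bool :=
  span_overlap (PySem.List.slice cube1 none (some 2)) (PySem.List.slice cube2 none (some 2)) &&
  span_overlap (PySem.List.slice cube1 (some 2) (some 4)) (PySem.List.slice cube2 (some 2) (some 4)) &&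
  span_overlap (PySem.List.slice cube1 (some 4) none) (PySem.List.slice cube2 (some 4) none)

def fracture_by (cube1 cube2 : List Int) : List (List Int) :=
  if !cube_overlaps cube1 cube2 then [cube1] else
  let xsides := get_subspans (PySem.List.slice cube1 none (some 2)) (PySem.List.slice cube2 none (some 2))
  let ysides := get_subspans (PySem.List.slice cube1 (some 2) (some 4)) (PySem.List.slice cube2 (some 2) (some 4))
  let zsides := get_subspans (PySem.List.slice cube1 (some 4) none) (PySem.List.slice cube2 (some 4) none)
  -- for xside, yside, zside in product(xsides, ysides, zsides): … subcubes.add(subcube)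
  (xsides.flatMap (fun x => ysides.flatMap (fun y => zsides.map (fun z => (x, y, z))))).foldl
    (fun (subcubes : PySem.Set (List Int)) xyz =>
      let vol := max 0 (xyz.1.2 - xyz.1.1) * max 0 (xyz.2.1.2 - xyz.2.1.1) * max 0 (xyz.2.2.2 - xyz.2.2.1)
      if vol == 0 then subcubes
      else PySem.Set.add subcubes [xyz.1.1, xyz.1.2, xyz.2.1.1, xyz.2.1.2, xyz.2.2.1, xyz.2.2.2])
    PySem.Set.empty

def stepA (filter : Bool) (cubes : PySem.Set (List Int)) (inst : Bool × List Int) :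
    PySem.Set (List Int) :=
  let is_on := inst.1
  let cube := inst.2
  if filter && !(decide (-50 ≤ pvGet cube 0) && decide (pvGet cube 0 ≤ 50)) then cubes
  else if is_on then
    -- add cube
    let tatr := cubes.foldl
      (fun (p : PySem.Set (List Int) × PySem.Set (List Int)) tcube =>
        if !cube_overlaps tcube cube then p
        else (PySem.Set.update p.1
                (PySem.Set.diff (fracture_by tcube cube) (fracture_by cube tcube)),
              PySem.Set.add p.2 tcube))
      (PySem.Set.ofList [cube], PySem.Set.empty)
    PySem.Set.update (PySem.Set.diff cubes tatr.2) tatr.1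
  else
    -- subtract cube
    let tatr := cubes.foldl
      (fun (p : PySem.Set (List Int) × PySem.Set (List Int)) mcube =>
        if !cube_overlaps mcube cube then p
        else (PySem.Set.update p.1
                (PySem.Set.diff (fracture_by mcube cube) (fracture_by cube mcube)),
              PySem.Set.add p.2 mcube))
      (PySem.Set.empty, PySem.Set.empty)
    PySem.Set.update (PySem.Set.diff cubes tatr.2) tatr.1

def track_cubes (instructions : List (Bool × List Int)) (filter : Bool) : Int :=
  let cubes : PySem.Set (List Int) := instructions.foldl (stepA filter) PySem.Set.empty
  (cubes.map volume).sum

-- ===== PORT B =====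
-- B keeps a list of (sign, box) with box a 6-tuple of coordinates, all extents positive.
def altStep (filter : Bool) (L : List (Int × (Int × Int × Int × Int × Int × Int)))
    (inst : Bool × List Int) : List (Int × (Int × Int × Int × Int × Int × Int)) :=
  if filter && !(decide (-50 ≤ pvGet inst.2 0) && decide (pvGet inst.2 0 ≤ 50)) then L
  else
    let negs := L.foldl
      (fun negs sc =>
        let i0 := max sc.2.1 (pvGet inst.2 0)
        let i1 := min sc.2.2.1 (pvGet inst.2 1)
        let j0 := max sc.2.2.2.1 (pvGet inst.2 2)
        let j1 := min sc.2.2.2.2.1 (pvGet inst.2 3)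
        let k0 := max sc.2.2.2.2.2.1 (pvGet inst.2 4)
        let k1 := min sc.2.2.2.2.2.2 (pvGet inst.2 5)
        if decide (i0 < i1) && decide (j0 < j1) && decide (k0 < k1) then
          negs ++ [(-sc.1, (i0, i1, j0, j1, k0, k1))]
        else negs) []
    let L2 := L ++ negs
    if inst.1 && decide (pvGet inst.2 0 < pvGet inst.2 1) &&
        decide (pvGet inst.2 2 < pvGet inst.2 3) &&
        decide (pvGet inst.2 4 < pvGet inst.2 5) then
      L2 ++ [(1, (pvGet inst.2 0, pvGet inst.2 1, pvGet inst.2 2,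
        pvGet inst.2 3, pvGet inst.2 4, pvGet inst.2 5))]
    else L2

def track_cubes_alt (instructions : List (Bool × List Int)) (filter : Bool) : Int :=
  let signed := instructions.foldl (altStep filter) []
  (signed.map (fun sc =>
    sc.1 * (sc.2.2.1 - sc.2.1) * (sc.2.2.2.2.1 - sc.2.2.2.1) * (sc.2.2.2.2.2.2 - sc.2.2.2.2.2.1))).sum

-- ===== PRECONDITION & SPEC =====
def skipB (filt : Bool) (c : List Int) : Bool :=
  filt && !c.isEmpty && !(decide (-50 ≤ pvGet c 0) && decide (pvGet c 0 ≤ 50))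

def preAux (filt : Bool) : List (Bool × List Int) → Bool → Bool
  | [], _ => true
  | ic :: tl, clean =>
    (skipB filt ic.2 || decide (ic.2.length = 6) ||
      (!ic.1 && clean && (!filt || !ic.2.isEmpty))) &&
    preAux filt tl (clean && (!ic.1 || skipB filt ic.2))

-- Pre_ admits instructions whose cube tuples are exactly 6 long, plus inert instructions
-- (filtered-out ones, and turn-offs before any effective turn-on) with tuples of any length.
-- It excludes inputs A still returns on: tuples LONGER than 6 (A silently ignores the trailing
-- coordinates) and turn-offs with malformed tuples after an effective turn-on whose boxes
-- happen never to be touched; see claim.json "cites".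
def Pre_track_cubes (instructions : List (Bool × List Int)) (filter : Bool) : Prop :=
  preAux filter instructions true = true
instance (instructions : List (Bool × List Int)) (filter : Bool) :
    Decidable (Pre_track_cubes instructions filter) := by unfold Pre_track_cubes; infer_instance
def pvWitness_track_cubes : (List (Bool × List Int)) × Bool :=
  ([(true, [0, 2, 0, 2, 0, 2]), (false, [1, 3, 1, 3, 1, 3])], false)

def Spec_track_cubes (instructions : List (Bool × List Int)) (filter : Bool) (out : Int) : Prop :=
  out = track_cubes_alt instructions filter
instance (instructions : List (Bool × List Int)) (filter : Bool) (out : Int) :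
    Decidable (Spec_track_cubes instructions filter out) := by unfold Spec_track_cubes; infer_instance

-- ===== CLAIM (what is proved, stated in full; the proofs are below) =====
def Claim_equal_track_cubes : Prop := ∀ (instructions : List (Bool × List Int)) (filter : Bool), Dom_track_cubes instructions filter → Pre_track_cubes instructions filter → Spec_track_cubes instructions filter (track_cubes instructions filter)

-- ===== LEMMAS AND PROOFS =====

-- ---------- basic semantic objects ----------

def b2n (b : Bool) : Nat := if b then 1 else 0
def b2i (b : Bool) : Int := if b then 1 else 0

-- a grid point and membership in a cube given as a 6-coordinate list
def memc (c : List Int) (p : Int × Int × Int) : Bool :=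
  decide (pvGet c 0 ≤ p.1 ∧ p.1 < pvGet c 1) &&
  decide (pvGet c 2 ≤ p.2.1 ∧ p.2.1 < pvGet c 3) &&
  decide (pvGet c 4 ≤ p.2.2 ∧ p.2.2 < pvGet c 5)

def cnt (S : List (List Int)) (p : Int × Int × Int) : Nat := S.countP (fun u => memc u p)

def membox (b : Int × Int × Int × Int × Int × Int) (p : Int × Int × Int) : Bool :=
  decide (b.1 ≤ p.1 ∧ p.1 < b.2.1) &&
  decide (b.2.2.1 ≤ p.2.1 ∧ p.2.1 < b.2.2.2.1) &&
  decide (b.2.2.2.2.1 ≤ p.2.2 ∧ p.2.2 < b.2.2.2.2.2)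

def sgn (L : List (Int × (Int × Int × Int × Int × Int × Int))) (p : Int × Int × Int) : Int :=
  (L.map (fun sc => if membox sc.2 p then sc.1 else 0)).sum

-- the region (as a pointwise indicator) both programs are tracking
def regStep (filter : Bool) (r : (Int × Int × Int) → Bool) (inst : Bool × List Int) :
    (Int × Int × Int) → Bool :=
  fun p =>
    if filter && !(decide (-50 ≤ pvGet inst.2 0) && decide (pvGet inst.2 0 ≤ 50)) then r p
    else if inst.1 then r p || memc inst.2 p
    else r p && !memc inst.2 p

-- ---------- evaluation of the port's primitives on 6-coordinate lists ----------

@[simp] lemma pvGet_six_zero (a b c d e f : Int) : pvGet [a,b,c,d,e,f] 0 = a := by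
  simp [pvGet, PySem.List.pyGet?, PySem.List.pyIdx?]
@[simp] lemma pvGet_six_one (a b c d e f : Int) : pvGet [a,b,c,d,e,f] 1 = b := by
  simp [pvGet, PySem.List.pyGet?, PySem.List.pyIdx?]
@[simp] lemma pvGet_six_two (a b c d e f : Int) : pvGet [a,b,c,d,e,f] 2 = c := by
  simp [pvGet, PySem.List.pyGet?, PySem.List.pyIdx?]
@[simp] lemma pvGet_six_three (a b c d e f : Int) : pvGet [a,b,c,d,e,f] 3 = d := by
  simp [pvGet, PySem.List.pyGet?, PySem.List.pyIdx?]
@[simp] lemma pvGet_six_four (a b c d e f : Int) : pvGet [a,b,c,d,e,f] 4 = e := by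
  simp [pvGet, PySem.List.pyGet?, PySem.List.pyIdx?]
@[simp] lemma pvGet_six_five (a b c d e f : Int) : pvGet [a,b,c,d,e,f] 5 = f := by
  simp [pvGet, PySem.List.pyGet?, PySem.List.pyIdx?]

@[simp] lemma pvGet_two_zero (a b : Int) : pvGet [a,b] 0 = a := by
  simp [pvGet, PySem.List.pyGet?, PySem.List.pyIdx?]
@[simp] lemma pvGet_two_one (a b : Int) : pvGet [a,b] 1 = b := by
  simp [pvGet, PySem.List.pyGet?, PySem.List.pyIdx?]

@[simp] lemma slice_six_x (a b c d e f : Int) :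
    PySem.List.slice [a,b,c,d,e,f] none (some 2) = [a,b] := by
  have := PySem.List.slice_to (xs := [a,b,c,d,e,f]) (b := 2) (by omega)
  simpa using this
@[simp] lemma slice_six_y (a b c d e f : Int) :
    PySem.List.slice [a,b,c,d,e,f] (some 2) (some 4) = [c,d] := by
  have := PySem.List.slice_toNat (xs := [a,b,c,d,e,f]) (a := 2) (b := 4) (by omega) (by omega)
  simpa using this
@[simp] lemma slice_six_z (a b c d e f : Int) :
    PySem.List.slice [a,b,c,d,e,f] (some 4) none = [e,f] := by
  have := PySem.List.slice_from (xs := [a,b,c,d,e,f]) (a := 4) (by omega)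
  simpa using this

lemma memc_six (a b c d e f : Int) (p : Int × Int × Int) :
    memc [a,b,c,d,e,f] p =
      (decide (a ≤ p.1 ∧ p.1 < b) && decide (c ≤ p.2.1 ∧ p.2.1 < d) &&
        decide (e ≤ p.2.2 ∧ p.2.2 < f)) := by
  simp [memc]

lemma span_overlap_two (a b x y : Int) :
    span_overlap [a,b] [x,y] = (decide (a < y) && decide (x < b)) := by
  simp [span_overlap]
  by_cases h1 : a < y <;> by_cases h2 : x < b <;> simp [h1, h2] <;> omega

lemma cube_overlaps_six (t0 t1 t2 t3 t4 t5 c0 c1 c2 c3 c4 c5 : Int) :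
    cube_overlaps [t0,t1,t2,t3,t4,t5] [c0,c1,c2,c3,c4,c5] =
      (decide (t0 < c1) && decide (c0 < t1) && (decide (t2 < c3) && decide (c2 < t3)) &&
        (decide (t4 < c5) && decide (c4 < t5))) := by
  simp [cube_overlaps, span_overlap_two]

lemma cube_overlaps_comm (t0 t1 t2 t3 t4 t5 c0 c1 c2 c3 c4 c5 : Int) :
    cube_overlaps [t0,t1,t2,t3,t4,t5] [c0,c1,c2,c3,c4,c5] =
      cube_overlaps [c0,c1,c2,c3,c4,c5] [t0,t1,t2,t3,t4,t5] := by
  simp only [cube_overlaps_six]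
  by_cases h1 : t0 < c1 <;> by_cases h2 : c0 < t1 <;> by_cases h3 : t2 < c3 <;>
    by_cases h4 : c2 < t3 <;> by_cases h5 : t4 < c5 <;> by_cases h6 : c4 < t5 <;>
    simp [h1, h2, h3, h4, h5, h6]

-- if a point is in both cubes they overlap
lemma overlap_of_mem (t0 t1 t2 t3 t4 t5 c0 c1 c2 c3 c4 c5 : Int) (p : Int × Int × Int)
    (ht : memc [t0,t1,t2,t3,t4,t5] p = true) (hc : memc [c0,c1,c2,c3,c4,c5] p = true) :
    cube_overlaps [t0,t1,t2,t3,t4,t5] [c0,c1,c2,c3,c4,c5] = true := by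
  simp only [memc_six, Bool.and_eq_true, decide_eq_true_eq] at ht hc
  simp only [cube_overlaps_six, Bool.and_eq_true, decide_eq_true_eq]
  omega

-- ---------- sorted chains and their consecutive pairs ----------

lemma pairwise_lt_head_le {a : Int} {t : List Int} (h : (a :: t).Pairwise (· < ·)) :
    ∀ y ∈ a :: t, a ≤ y := by
  intro y hy
  rcases List.mem_cons.mp hy with rfl | hy
  · exact le_refl _
  · exact le_of_lt ((List.pairwise_cons.mp h).1 y hy)

lemma head?_eq_of_min {l : List Int} {m : Int} (hp : l.Pairwise (· < ·))
    (hm : m ∈ l) (hmin : ∀ y ∈ l, m ≤ y) : l.head? = some m := by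
  cases l with
  | nil => cases hm
  | cons a t =>
    have h1 : m ≤ a := hmin a (List.mem_cons_self)
    have h2 : a ≤ m := pairwise_lt_head_le hp m hm
    simp [le_antisymm h1 h2]

lemma getLast?_eq_of_max {l : List Int} {m : Int} (hp : l.Pairwise (· < ·))
    (hm : m ∈ l) (hmax : ∀ y ∈ l, y ≤ m) : l.getLast? = some m := by
  rw [List.getLast?_eq_head?_reverse]
  have hp' : l.reverse.Pairwise (· > ·) := by
    rw [List.pairwise_reverse]; exact hp
  cases hrev : l.reverse with
  | nil =>
    rw [List.reverse_eq_nil_iff] at hrev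
    subst hrev; cases hm
  | cons a t =>
    have hma : a ∈ l := by
      have : a ∈ l.reverse := by rw [hrev]; exact List.mem_cons_self
      simpa using this
    have h1 : a ≤ m := hmax a hma
    have h2 : m ≤ a := by
      have hm' : m ∈ a :: t := by rw [← hrev]; simpa using hm
      rcases List.mem_cons.mp hm' with rfl | hmt
      · exact le_refl _
      · rw [hrev] at hp'
        exact le_of_lt ((List.pairwise_cons.mp hp').1 m hmt)
    simp [le_antisymm h2 h1]

lemma chain_count (x : Int) :
    ∀ (l : List Int), l.Pairwise (· < ·) →
      ((l.zip l.tail).countP (fun pr => decide (pr.1 ≤ x ∧ x < pr.2)))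
      = if (l.head?.any (fun h => decide (h ≤ x)) && l.getLast?.any (fun g => decide (x < g)))
          then 1 else 0 := by
  intro l
  induction l with
  | nil => intro _; simp
  | cons a t ih =>
    intro hp
    cases t with
    | nil =>
      simp only [List.tail, List.zip_nil_right, List.countP_nil, List.head?_cons,
        List.getLast?_singleton, Option.any_some]
      have : ¬(a ≤ x ∧ x < a) := by omega
      simp [this]
    | cons b t2 =>
      have hp' : (b :: t2).Pairwise (· < ·) := (List.pairwise_cons.mp hp).2
      have hab : a < b := (List.pairwise_cons.mp hp).1 b List.mem_cons_self
      have hbg : ∀ g ∈ (b :: t2).getLast?, b ≤ g := by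
        intro g hg
        have hgl : g ∈ b :: t2 := List.mem_of_mem_getLast? hg
        exact pairwise_lt_head_le hp' g hgl
      have ihv := ih hp'
      have hzip : ((a :: b :: t2).zip (a :: b :: t2).tail)
          = (a, b) :: ((b :: t2).zip t2) := by simp [List.zip]
      rw [hzip]
      rw [List.countP_cons]
      have htail : (b :: t2).tail = t2 := rfl
      rw [htail] at ihv
      rw [ihv]
      cases hgl : (b :: t2).getLast? with
      | none => simp at hgl
      | some g =>
        have hbg' : b ≤ g := hbg g (by simp [hgl])
        have hlast : (a :: b :: t2).getLast? = some g := by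
          rw [← hgl]; rfl
        rw [hlast]
        simp only [List.head?_cons, Option.any_some]
        by_cases h1 : a ≤ x <;> by_cases h2 : x < b <;> by_cases h3 : b ≤ x <;>
          by_cases h4 : x < g <;> simp [h1, h2, h3, h4] <;> omega

lemma chain_mem (u v : Int) :
    ∀ (l : List Int), l.Pairwise (· < ·) →
      ((u, v) ∈ l.zip l.tail ↔
        (u ∈ l ∧ v ∈ l ∧ u < v ∧ ∀ q ∈ l, ¬(u < q ∧ q < v))) := by
  intro l
  induction l with
  | nil => intro _; simp
  | cons a t ih =>
    intro hp
    cases t with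
    | nil =>
      constructor
      · intro h; simp [List.zip] at h
      · rintro ⟨hu, hv, huv, _⟩
        simp at hu hv; omega
    | cons b t2 =>
      have hp' : (b :: t2).Pairwise (· < ·) := (List.pairwise_cons.mp hp).2
      have hab : a < b := (List.pairwise_cons.mp hp).1 b List.mem_cons_self
      have hamin : ∀ y ∈ b :: t2, a < y := (List.pairwise_cons.mp hp).1
      have hbmin : ∀ y ∈ b :: t2, b ≤ y := fun y hy => pairwise_lt_head_le hp' y hy
      have hzip : ((a :: b :: t2).zip (a :: b :: t2).tail)
          = (a, b) :: ((b :: t2).zip t2) := by simp [List.zip]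
      have htail : (b :: t2).tail = t2 := rfl
      rw [hzip]
      constructor
      · intro hmem
        rcases List.mem_cons.mp hmem with heq | hmem2
        · obtain ⟨rfl, rfl⟩ := Prod.mk.inj heq
          refine ⟨List.mem_cons_self, by simp, hab, ?_⟩
          intro q hq ⟨h1, h2⟩
          rcases List.mem_cons.mp hq with rfl | hq2
          · omega
          · exact absurd (hbmin q hq2) (by omega)
        · have := (ih hp').mp hmem2
          obtain ⟨hu, hv, huv, hbet⟩ := this
          refine ⟨List.mem_cons_of_mem _ hu, List.mem_cons_of_mem _ hv, huv, ?_⟩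
          intro q hq ⟨h1, h2⟩
          rcases List.mem_cons.mp hq with rfl | hq2
          · exact absurd (hamin u hu) (by omega)
          · exact hbet q hq2 ⟨h1, h2⟩
      · rintro ⟨hu, hv, huv, hbet⟩
        rcases List.mem_cons.mp hu with rfl | hu2
        · -- u = a; v must be b
          have hvb : v = b := by
            rcases List.mem_cons.mp hv with rfl | hv2
            · omega
            · have hbv : b ≤ v := hbmin v hv2
              rcases eq_or_lt_of_le hbv with heq | hlt
              · omega
              · exact absurd (hbet b (by simp) ⟨hab, hlt⟩) (by simp)
          subst hvb
          exact List.mem_cons_self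
        · have hva : v ≠ a := by
            intro h; subst h
            exact absurd (hamin u hu2) (by omega)
          have hv2 : v ∈ b :: t2 := by
            rcases List.mem_cons.mp hv with rfl | h
            · exact absurd rfl hva
            · exact h
          apply List.mem_cons_of_mem
          exact (ih hp').mpr ⟨hu2, hv2, huv, fun q hq => hbet q (List.mem_cons_of_mem _ hq)⟩


-- ---------- subspans ----------

def spanPts (a0 a1 b0 b1 : Int) : List Int :=
  PySem.List.sorted
    (PySem.Set.ofList (([a0,a1] ++ [b0,b1]).filter (fun x => decide (a0 ≤ x ∧ x ≤ a1))))
    (fun x => x) false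

def ptsOf (a0 a1 b0 b1 y : Int) : Prop :=
  (a0 ≤ y ∧ y ≤ a1) ∧ (y = a0 ∨ y = a1 ∨ y = b0 ∨ y = b1)

lemma get_subspans_eq (a0 a1 b0 b1 : Int) :
    get_subspans [a0,a1] [b0,b1] = (spanPts a0 a1 b0 b1).zip (spanPts a0 a1 b0 b1).tail := by
  simp [get_subspans, spanPts]

lemma spanPts_pairwise (a0 a1 b0 b1 : Int) : (spanPts a0 a1 b0 b1).Pairwise (· < ·) :=
  PySem.List.sorted_ofList_pairwise_lt _

lemma mem_spanPts (a0 a1 b0 b1 y : Int) :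
    y ∈ spanPts a0 a1 b0 b1 ↔ ptsOf a0 a1 b0 b1 y := by
  simp [spanPts, PySem.List.mem_sorted, PySem.Set.mem_ofList, List.mem_filter, ptsOf]
  tauto

lemma span_count (a0 a1 b0 b1 x : Int) :
    (get_subspans [a0,a1] [b0,b1]).countP (fun pr => decide (pr.1 ≤ x ∧ x < pr.2))
      = b2n (decide (a0 ≤ x ∧ x < a1)) := by
  rw [get_subspans_eq, chain_count x _ (spanPts_pairwise a0 a1 b0 b1)]
  by_cases h : a0 ≤ a1
  · have ha0 : a0 ∈ spanPts a0 a1 b0 b1 := (mem_spanPts ..).mpr ⟨⟨le_refl _, h⟩, Or.inl rfl⟩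
    have ha1 : a1 ∈ spanPts a0 a1 b0 b1 := (mem_spanPts ..).mpr ⟨⟨h, le_refl _⟩, Or.inr (Or.inl rfl)⟩
    have hmin : ∀ y ∈ spanPts a0 a1 b0 b1, a0 ≤ y := fun y hy => ((mem_spanPts ..).mp hy).1.1
    have hmax : ∀ y ∈ spanPts a0 a1 b0 b1, y ≤ a1 := fun y hy => ((mem_spanPts ..).mp hy).1.2
    rw [head?_eq_of_min (spanPts_pairwise ..) ha0 hmin,
        getLast?_eq_of_max (spanPts_pairwise ..) ha1 hmax]
    simp only [Option.any_some]
    by_cases h1 : a0 ≤ x <;> by_cases h2 : x < a1 <;> simp [h1, h2, b2n]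
  · have hnil : spanPts a0 a1 b0 b1 = [] := by
      rw [List.eq_nil_iff_forall_not_mem]
      intro y hy
      have := ((mem_spanPts ..).mp hy).1
      omega
    rw [hnil]
    have : ¬(a0 ≤ x ∧ x < a1) := by omega
    simp [this, b2n]

lemma span_mem (a0 a1 b0 b1 u v : Int) :
    (u, v) ∈ get_subspans [a0,a1] [b0,b1] ↔
      (ptsOf a0 a1 b0 b1 u ∧ ptsOf a0 a1 b0 b1 v ∧ u < v ∧
        ∀ q, ptsOf a0 a1 b0 b1 q → ¬(u < q ∧ q < v)) := by
  rw [get_subspans_eq, chain_mem u v _ (spanPts_pairwise a0 a1 b0 b1)]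
  simp only [mem_spanPts]

lemma nodup_zip_tail : ∀ (l : List Int), l.Pairwise (· < ·) → (l.zip l.tail).Nodup := by
  intro l
  induction l with
  | nil => intro _; simp
  | cons a t ih =>
    intro hp
    cases t with
    | nil => simp [List.zip]
    | cons b t2 =>
      have hp' : (b :: t2).Pairwise (· < ·) := (List.pairwise_cons.mp hp).2
      have hamin : ∀ y ∈ b :: t2, a < y := (List.pairwise_cons.mp hp).1
      have hzip : ((a :: b :: t2).zip (a :: b :: t2).tail)
          = (a, b) :: ((b :: t2).zip t2) := by simp [List.zip]
      rw [hzip]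
      refine List.nodup_cons.mpr ⟨?_, ih hp'⟩
      intro hmem
      have := (chain_mem a b _ hp').mp hmem
      exact absurd (hamin a this.1) (by omega)

lemma nodup_subspans (a0 a1 b0 b1 : Int) : (get_subspans [a0,a1] [b0,b1]).Nodup := by
  rw [get_subspans_eq]
  exact nodup_zip_tail _ (spanPts_pairwise ..)

-- ---------- the product of side spans; normal form of fracture_by ----------

def sideProd (xs ys zs : List (Int × Int)) : List ((Int × Int) × (Int × Int) × (Int × Int)) :=
  xs.flatMap (fun x => ys.flatMap (fun y => zs.map (fun z => (x, y, z))))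

def toCube (w : (Int × Int) × (Int × Int) × (Int × Int)) : List Int :=
  [w.1.1, w.1.2, w.2.1.1, w.2.1.2, w.2.2.1, w.2.2.2]

def volTriple (w : (Int × Int) × (Int × Int) × (Int × Int)) : Int :=
  max 0 (w.1.2 - w.1.1) * max 0 (w.2.1.2 - w.2.1.1) * max 0 (w.2.2.2 - w.2.2.1)

lemma mem_sideProd {xs ys zs : List (Int × Int)} {w : (Int × Int) × (Int × Int) × (Int × Int)} :
    w ∈ sideProd xs ys zs ↔ (w.1 ∈ xs ∧ w.2.1 ∈ ys ∧ w.2.2 ∈ zs) := by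
  simp only [sideProd, List.mem_flatMap, List.mem_map]
  constructor
  · rintro ⟨x', hx', y', hy', z', hz', heq⟩
    subst heq
    exact ⟨hx', hy', hz'⟩
  · rintro ⟨hx, hy, hz⟩
    exact ⟨w.1, hx, w.2.1, hy, w.2.2, hz, rfl⟩

lemma toCube_inj {w w' : (Int × Int) × (Int × Int) × (Int × Int)}
    (h : toCube w = toCube w') : w = w' := by
  obtain ⟨⟨a,b⟩,⟨c,d⟩,⟨e,f⟩⟩ := w
  obtain ⟨⟨a',b'⟩,⟨c',d'⟩,⟨e',f'⟩⟩ := w'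
  simp [toCube] at h
  obtain ⟨rfl, rfl, rfl, rfl, rfl, rfl⟩ := h
  rfl

lemma nodup_sideProd : ∀ (xs ys zs : List (Int × Int)), xs.Nodup → ys.Nodup → zs.Nodup →
    (sideProd xs ys zs).Nodup := by
  intro xs
  induction xs with
  | nil => intro _ _ _ _ _; simp [sideProd]
  | cons x xs ih =>
    intro ys zs hx hy hz
    have hstep : sideProd (x :: xs) ys zs
        = (ys.flatMap (fun y => zs.map (fun z => (x, y, z)))) ++ sideProd xs ys zs := by
      simp [sideProd]
    rw [hstep]
    refine List.Nodup.append ?_ (ih ys zs (List.nodup_cons.mp hx).2 hy hz) ?_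
    · -- inner slab for fixed x is nodup
      clear hstep ih
      induction ys with
      | nil => simp
      | cons y ys ihy =>
        have hy' := List.nodup_cons.mp hy
        simp only [List.flatMap_cons]
        refine List.Nodup.append ?_ (ihy hy'.2) ?_
        · exact List.Nodup.map (fun z z' h => by
            simpa using congrArg (fun (w : (Int × Int) × (Int × Int) × (Int × Int)) => w.2.2) h) hz
        · intro w hw hw'
          simp only [List.mem_map] at hw
          simp only [List.mem_flatMap, List.mem_map] at hw'
          obtain ⟨z, _, rfl⟩ := hw
          obtain ⟨y', hy'', z', _, heq⟩ := hw'
          have : y = y' := by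
            have := congrArg (fun (w : (Int × Int) × (Int × Int) × (Int × Int)) => w.2.1) heq
            simpa using this.symm
          exact hy'.1 (this ▸ hy'')
    · intro w hw hw'
      have h1 : w.1 = x := by
        simp only [List.mem_flatMap, List.mem_map] at hw
        obtain ⟨y, _, z, _, rfl⟩ := hw
        rfl
      have h2 : w.1 ∈ xs := (mem_sideProd.mp hw').1
      exact (List.nodup_cons.mp hx).1 (h1 ▸ h2)

lemma countP_flatMap {α β : Type} (l : List α) (g : α → List β) (q : β → Bool) :
    (l.flatMap g).countP q = (l.map fun x => (g x).countP q).sum := by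
  induction l with
  | nil => simp
  | cons a t ih => simp [List.flatMap_cons, List.countP_append, ih]

lemma sum_map_ite_count {α : Type} (l : List α) (q : α → Bool) (K : Nat) :
    (l.map fun x => if q x then K else 0).sum = l.countP q * K := by
  induction l with
  | nil => simp
  | cons a t ih =>
    by_cases h : q a <;> simp [List.countP_cons, h, ih, Nat.add_mul, Nat.add_comm]

lemma countP_sideProd (xs ys zs : List (Int × Int)) (sx sy sz : (Int × Int) → Bool) :
    (sideProd xs ys zs).countP (fun w => sx w.1 && sy w.2.1 && sz w.2.2)
      = xs.countP sx * (ys.countP sy * zs.countP sz) := by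
  unfold sideProd
  rw [countP_flatMap]
  have hx : ∀ x : Int × Int,
      ((ys.flatMap (fun y => zs.map (fun z => (x, y, z)))).countP
        (fun w => sx w.1 && sy w.2.1 && sz w.2.2))
      = if sx x then ys.countP sy * zs.countP sz else 0 := by
    intro x
    rw [countP_flatMap]
    have hy : ∀ y : Int × Int,
        ((zs.map (fun z => (x, y, z))).countP (fun w => sx w.1 && sy w.2.1 && sz w.2.2))
        = if sx x && sy y then zs.countP sz else 0 := by
      intro y
      have hrw : ((zs.map (fun z => (x, y, z))).countP (fun w => sx w.1 && sy w.2.1 && sz w.2.2))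
          = zs.countP (fun z => sx x && sy y && sz z) := by
        rw [List.countP_map]
        exact List.countP_congr (fun z hz => by simp [Function.comp])
      rw [hrw]
      by_cases h1 : sx x <;> by_cases h2 : sy y <;> simp [h1, h2]
    calc (ys.map fun y => ((zs.map (fun z => (x, y, z))).countP
            (fun w => sx w.1 && sy w.2.1 && sz w.2.2))).sum
        = (ys.map fun y => if sx x && sy y then zs.countP sz else 0).sum := by
          congr 1; exact List.map_congr_left (fun y _ => hy y)
      _ = if sx x then ys.countP sy * zs.countP sz else 0 := by
          by_cases h1 : sx x
          · simp only [h1, Bool.true_and]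
            exact sum_map_ite_count ys sy (zs.countP sz)
          · simp [h1]
    
  calc (xs.map fun x => ((ys.flatMap (fun y => zs.map (fun z => (x, y, z)))).countP
          (fun w => sx w.1 && sy w.2.1 && sz w.2.2))).sum
      = (xs.map fun x => if sx x then ys.countP sy * zs.countP sz else 0).sum := by
        congr 1; exact List.map_congr_left (fun x _ => hx x)
    _ = xs.countP sx * (ys.countP sy * zs.countP sz) :=
        sum_map_ite_count xs sx _


-- ---------- fracture_by in normal form ----------

lemma foldl_skip_add {α β : Type} [BEq β] [LawfulBEq β] (l : List α) (q : α → Bool) (f : α → β)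
    (hnd : ((l.filter (fun x => !q x)).map f).Nodup) :
    l.foldl (fun s x => if q x then s else PySem.Set.add s (f x)) PySem.Set.empty
      = (l.filter (fun x => !q x)).map f := by
  have h1 : l.foldl (fun s x => if q x then s else PySem.Set.add s (f x)) PySem.Set.empty
      = l.foldl (fun s x => if (!q x) = true then PySem.Set.add s (f x) else s) PySem.Set.empty := by
    apply PySem.List.foldl_congr_mem
    intro acc x hx
    cases hq : q x <;> simp [hq]
  rw [h1, PySem.List.foldl_if_eq_foldl_filter]
  rw [← PySem.Set.update_map_eq_foldl_add]
  rw [show (PySem.Set.empty : PySem.Set β) = ([] : List β) from rfl, PySem.Set.update_nil_left]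
  exact PySem.Set.ofList_eq_self_of_nodup _ hnd

lemma fracture_eq (t0 t1 t2 t3 t4 t5 c0 c1 c2 c3 c4 c5 : Int)
    (hov : cube_overlaps [t0,t1,t2,t3,t4,t5] [c0,c1,c2,c3,c4,c5] = true) :
    fracture_by [t0,t1,t2,t3,t4,t5] [c0,c1,c2,c3,c4,c5]
      = ((sideProd (get_subspans [t0,t1] [c0,c1]) (get_subspans [t2,t3] [c2,c3])
            (get_subspans [t4,t5] [c4,c5])).filter
          (fun w => !(volTriple w == 0))).map toCube := by
  have hnd : (((sideProd (get_subspans [t0,t1] [c0,c1]) (get_subspans [t2,t3] [c2,c3])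
        (get_subspans [t4,t5] [c4,c5])).filter (fun w => !(volTriple w == 0))).map toCube).Nodup := by
    refine List.Nodup.map (fun a b h => toCube_inj h) ?_
    exact List.Nodup.filter _
      (nodup_sideProd _ _ _ (nodup_subspans ..) (nodup_subspans ..) (nodup_subspans ..))
  unfold fracture_by
  rw [hov]
  simp only [Bool.not_true, Bool.false_eq_true, if_false, slice_six_x, slice_six_y, slice_six_z]
  exact foldl_skip_add _ (fun w => volTriple w == 0) toCube hnd

lemma fracture_countP (t0 t1 t2 t3 t4 t5 c0 c1 c2 c3 c4 c5 : Int) (p : Int × Int × Int)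
    (hov : cube_overlaps [t0,t1,t2,t3,t4,t5] [c0,c1,c2,c3,c4,c5] = true) :
    (fracture_by [t0,t1,t2,t3,t4,t5] [c0,c1,c2,c3,c4,c5]).countP (fun u => memc u p)
      = b2n (memc [t0,t1,t2,t3,t4,t5] p) := by
  rw [fracture_eq _ _ _ _ _ _ _ _ _ _ _ _ hov, List.countP_map, List.countP_filter]
  have habs : ∀ w : (Int × Int) × (Int × Int) × (Int × Int),
      (((fun u => memc u p) ∘ toCube) w && !(volTriple w == 0)) = memc (toCube w) p := by
    intro w
    cases hm : memc (toCube w) p with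
    | false => simp [Function.comp, hm]
    | true =>
      simp only [Function.comp, hm, Bool.true_and]
      have hb : w.1.1 ≤ p.1 ∧ p.1 < w.1.2 ∧ w.2.1.1 ≤ p.2.1 ∧ p.2.1 < w.2.1.2 ∧
          w.2.2.1 ≤ p.2.2 ∧ p.2.2 < w.2.2.2 := by
        have := hm
        simp only [toCube, memc_six, Bool.and_eq_true, decide_eq_true_eq] at this
        exact ⟨this.1.1.1, this.1.1.2, this.1.2.1, this.1.2.2, this.2.1, this.2.2⟩
      have hpos : volTriple w ≠ 0 := by
        unfold volTriple
        have h1 : (0:Int) < max 0 (w.1.2 - w.1.1) := by omega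
        have h2 : (0:Int) < max 0 (w.2.1.2 - w.2.1.1) := by omega
        have h3 : (0:Int) < max 0 (w.2.2.2 - w.2.2.1) := by omega
        have := mul_pos (mul_pos h1 h2) h3
        omega
      simp [hpos]
  rw [List.countP_congr (fun w _ => by rw [habs w])]
  have hsplit : ∀ w : (Int × Int) × (Int × Int) × (Int × Int),
      memc (toCube w) p =
        ((fun pr : Int × Int => decide (pr.1 ≤ p.1 ∧ p.1 < pr.2)) w.1 &&
         (fun pr : Int × Int => decide (pr.1 ≤ p.2.1 ∧ p.2.1 < pr.2)) w.2.1 &&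
         (fun pr : Int × Int => decide (pr.1 ≤ p.2.2 ∧ p.2.2 < pr.2)) w.2.2) := by
    intro w
    simp [toCube, memc_six]
  rw [List.countP_congr (fun w _ => by rw [hsplit w])]
  have := countP_sideProd (get_subspans [t0,t1] [c0,c1]) (get_subspans [t2,t3] [c2,c3])
    (get_subspans [t4,t5] [c4,c5])
    (fun pr : Int × Int => decide (pr.1 ≤ p.1 ∧ p.1 < pr.2))
    (fun pr : Int × Int => decide (pr.1 ≤ p.2.1 ∧ p.2.1 < pr.2))
    (fun pr : Int × Int => decide (pr.1 ≤ p.2.2 ∧ p.2.2 < pr.2))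
  rw [this, span_count, span_count, span_count]
  simp only [memc_six]
  by_cases h1 : t0 ≤ p.1 ∧ p.1 < t1 <;> by_cases h2 : t2 ≤ p.2.1 ∧ p.2.1 < t3 <;>
    by_cases h3 : t4 ≤ p.2.2 ∧ p.2.2 < t5 <;> simp [h1, h2, h3, b2n]

lemma mem_fracture_iff (t0 t1 t2 t3 t4 t5 c0 c1 c2 c3 c4 c5 : Int) (u : List Int)
    (hov : cube_overlaps [t0,t1,t2,t3,t4,t5] [c0,c1,c2,c3,c4,c5] = true) :
    u ∈ fracture_by [t0,t1,t2,t3,t4,t5] [c0,c1,c2,c3,c4,c5] ↔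
      ∃ w : (Int × Int) × (Int × Int) × (Int × Int),
        w.1 ∈ get_subspans [t0,t1] [c0,c1] ∧ w.2.1 ∈ get_subspans [t2,t3] [c2,c3] ∧
        w.2.2 ∈ get_subspans [t4,t5] [c4,c5] ∧ volTriple w ≠ 0 ∧ u = toCube w := by
  rw [fracture_eq _ _ _ _ _ _ _ _ _ _ _ _ hov]
  simp only [List.mem_map, List.mem_filter, mem_sideProd]
  constructor
  · rintro ⟨w, ⟨⟨h1, h2, h3⟩, h4⟩, rfl⟩
    exact ⟨w, h1, h2, h3, by simpa using h4, rfl⟩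
  · rintro ⟨w, h1, h2, h3, h4, rfl⟩
    exact ⟨w, ⟨⟨h1, h2, h3⟩, by simpa using h4⟩, rfl⟩

-- a fragment of T containing p forces p ∈ T
lemma memc_of_mem_fracture (t0 t1 t2 t3 t4 t5 c0 c1 c2 c3 c4 c5 : Int) (u : List Int)
    (p : Int × Int × Int)
    (hov : cube_overlaps [t0,t1,t2,t3,t4,t5] [c0,c1,c2,c3,c4,c5] = true)
    (hu : u ∈ fracture_by [t0,t1,t2,t3,t4,t5] [c0,c1,c2,c3,c4,c5])
    (hp : memc u p = true) : memc [t0,t1,t2,t3,t4,t5] p = true := by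
  obtain ⟨w, h1, h2, h3, _, rfl⟩ := (mem_fracture_iff _ _ _ _ _ _ _ _ _ _ _ _ _ hov).mp hu
  obtain ⟨⟨wa, wb⟩, ⟨wc, wd⟩, we, wf⟩ := w
  rw [span_mem] at h1 h2 h3
  simp only [toCube, memc_six, Bool.and_eq_true, decide_eq_true_eq] at hp ⊢
  have A1 := h1.1.1
  have A2 := h1.2.1.1
  have B1 := h2.1.1
  have B2 := h2.2.1.1
  have C1 := h3.1.1
  have C2 := h3.2.1.1
  unfold ptsOf at A1 A2 B1 B2 C1 C2
  omega

lemma span_swap (a0 a1 b0 b1 u v x : Int)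
    (h : (u, v) ∈ get_subspans [a0,a1] [b0,b1])
    (hx : u ≤ x ∧ x < v) (hb : b0 ≤ x ∧ x < b1) :
    (u, v) ∈ get_subspans [b0,b1] [a0,a1] := by
  rw [span_mem] at h ⊢
  obtain ⟨⟨hub, huo⟩, ⟨hvb, hvo⟩, huv, hbet⟩ := h
  have hu_b0 : b0 ≤ u := by
    by_contra hlt
    exact hbet b0 ⟨⟨by omega, by omega⟩, Or.inr (Or.inr (Or.inl rfl))⟩ ⟨by omega, by omega⟩
  have hv_b1 : v ≤ b1 := by
    by_contra hlt
    exact hbet b1 ⟨⟨by omega, by omega⟩, Or.inr (Or.inr (Or.inr rfl))⟩ ⟨by omega, by omega⟩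
  refine ⟨⟨⟨by omega, by omega⟩, ?_⟩, ⟨⟨by omega, by omega⟩, ?_⟩, huv, ?_⟩
  · tauto
  · tauto
  · intro q ⟨⟨hq1, hq2⟩, hq3⟩ ⟨hl1, hl2⟩
    exact hbet q ⟨⟨by omega, by omega⟩, by tauto⟩ ⟨hl1, hl2⟩

-- a fragment of T containing a point of C is also a fragment of C
lemma mem_fracture_swap (t0 t1 t2 t3 t4 t5 c0 c1 c2 c3 c4 c5 : Int) (u : List Int)
    (p : Int × Int × Int)
    (hov : cube_overlaps [t0,t1,t2,t3,t4,t5] [c0,c1,c2,c3,c4,c5] = true)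
    (hu : u ∈ fracture_by [t0,t1,t2,t3,t4,t5] [c0,c1,c2,c3,c4,c5])
    (hp : memc u p = true) (hpc : memc [c0,c1,c2,c3,c4,c5] p = true) :
    u ∈ fracture_by [c0,c1,c2,c3,c4,c5] [t0,t1,t2,t3,t4,t5] := by
  have hov' : cube_overlaps [c0,c1,c2,c3,c4,c5] [t0,t1,t2,t3,t4,t5] = true := by
    rw [← cube_overlaps_comm]; exact hov
  obtain ⟨w, h1, h2, h3, hvol, rfl⟩ := (mem_fracture_iff _ _ _ _ _ _ _ _ _ _ _ _ _ hov).mp hu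
  obtain ⟨⟨wa, wb⟩, ⟨wc, wd⟩, we, wf⟩ := w
  simp only [toCube, memc_six, Bool.and_eq_true, decide_eq_true_eq] at hp hpc
  refine (mem_fracture_iff _ _ _ _ _ _ _ _ _ _ _ _ _ hov').mpr
    ⟨((wa, wb), (wc, wd), we, wf), ?_, ?_, ?_, hvol, rfl⟩
  · exact span_swap _ _ _ _ _ _ _ h1 ⟨hp.1.1.1, hp.1.1.2⟩ ⟨hpc.1.1.1, hpc.1.1.2⟩
  · exact span_swap _ _ _ _ _ _ _ h2 ⟨hp.1.2.1, hp.1.2.2⟩ ⟨hpc.1.2.1, hpc.1.2.2⟩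
  · exact span_swap _ _ _ _ _ _ _ h3 ⟨hp.2.1, hp.2.2⟩ ⟨hpc.2.1, hpc.2.2⟩

lemma nodup_fracture (t0 t1 t2 t3 t4 t5 c0 c1 c2 c3 c4 c5 : Int)
    (hov : cube_overlaps [t0,t1,t2,t3,t4,t5] [c0,c1,c2,c3,c4,c5] = true) :
    (fracture_by [t0,t1,t2,t3,t4,t5] [c0,c1,c2,c3,c4,c5]).Nodup := by
  rw [fracture_eq _ _ _ _ _ _ _ _ _ _ _ _ hov]
  refine List.Nodup.map (fun a b h => toCube_inj h) ?_
  exact List.Nodup.filter _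
    (nodup_sideProd _ _ _ (nodup_subspans ..) (nodup_subspans ..) (nodup_subspans ..))


-- ---------- counting over Python sets ----------

lemma diff_eq_filter {α : Type} [BEq α] (A B : List α) :
    PySem.Set.diff A B = A.filter (fun x => !(PySem.Set.contains B x)) := rfl

lemma cnt_update (S xs : List (List Int)) (p : Int × Int × Int) (hx : xs.Nodup)
    (hdisj : ∀ u ∈ xs, memc u p = true → u ∉ S) :
    cnt (PySem.Set.update S xs) p = cnt S p + cnt xs p := by
  rw [PySem.Set.update_eq_append_filter]
  unfold cnt
  rw [List.countP_append]
  congr 1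
  rw [PySem.Set.ofList_eq_self_of_nodup _ hx, List.countP_filter]
  apply List.countP_congr
  intro u hu
  cases hm : memc u p with
  | false => simp [hm]
  | true =>
    have : ¬ PySem.Set.contains S u = true := by
      rw [PySem.Set.contains_iff]
      exact hdisj u hu hm
    simp only [hm, Bool.true_and, Bool.not_eq_true', true_iff]
    simp only [Bool.not_eq_true] at this ⊢
    exact Bool.not_eq_true _ ▸ (by simpa using this)

lemma nodup_foldl_update (ts : List (List Int)) (g : List Int → List (List Int))
    (s0 : List (List Int)) (h0 : s0.Nodup) :
    (ts.foldl (fun s t => PySem.Set.update s (g t)) s0).Nodup := by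
  induction ts generalizing s0 with
  | nil => exact h0
  | cons t ts ih => exact ih _ (PySem.Set.nodup_update _ _ h0)

lemma mem_foldl_update (ts : List (List Int)) (g : List Int → List (List Int))
    (s0 : List (List Int)) (u : List Int) :
    u ∈ ts.foldl (fun s t => PySem.Set.update s (g t)) s0 ↔
      u ∈ s0 ∨ ∃ t ∈ ts, u ∈ g t := by
  induction ts generalizing s0 with
  | nil => simp
  | cons t ts ih =>
    simp only [List.foldl_cons, ih, PySem.Set.mem_update, List.mem_cons]
    constructor
    · rintro ((h | h) | ⟨t', ht', hu⟩)
      · exact Or.inl h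
      · exact Or.inr ⟨t, Or.inl rfl, h⟩
      · exact Or.inr ⟨t', Or.inr ht', hu⟩
    · rintro (h | ⟨t', (rfl | ht'), hu⟩)
      · exact Or.inl (Or.inl h)
      · exact Or.inl (Or.inr hu)
      · exact Or.inr ⟨t', ht', hu⟩

lemma cnt_foldl_update (g : List Int → List (List Int)) (p : Int × Int × Int) :
    ∀ (ts : List (List Int)) (s0 : List (List Int)), ts.Nodup → (∀ t ∈ ts, (g t).Nodup) →
    s0.Nodup →
    (∀ t ∈ ts, ∀ u ∈ g t, memc u p = true →
      (u ∉ s0 ∧ ∀ t' ∈ ts, t' ≠ t → u ∉ g t')) →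
    cnt (ts.foldl (fun s t => PySem.Set.update s (g t)) s0) p
      = cnt s0 p + (ts.map (fun t => cnt (g t) p)).sum := by
  intro ts
  induction ts with
  | nil => intro s0 _ _ _ _; simp
  | cons t ts ih =>
    intro s0 hts hg h0 hdisj
    simp only [List.foldl_cons, List.map_cons, List.sum_cons]
    have hts' := List.nodup_cons.mp hts
    rw [ih (PySem.Set.update s0 (g t)) hts'.2
      (fun t' ht' => hg t' (List.mem_cons_of_mem _ ht'))
      (PySem.Set.nodup_update _ _ h0) ?_]
    · rw [cnt_update _ _ _ (hg t List.mem_cons_self)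
        (fun u hu hm => (hdisj t List.mem_cons_self u hu hm).1)]
      omega
    · intro t' ht' u hu hm
      have hd := hdisj t' (List.mem_cons_of_mem _ ht') u hu hm
      constructor
      · rw [PySem.Set.mem_update]
        rintro (h | h)
        · exact hd.1 h
        · exact hd.2 t List.mem_cons_self (fun he => hts'.1 (he ▸ ht')) h
      · exact fun t'' ht'' hne => hd.2 t'' (List.mem_cons_of_mem _ ht'') hne

lemma two_le_cnt {S : List (List Int)} {u t : List Int} {p : Int × Int × Int}
    (hu : u ∈ S) (ht : t ∈ S) (hne : u ≠ t)
    (h1 : memc u p = true) (h2 : memc t p = true) : 2 ≤ cnt S p := by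
  have hsub : List.Subperm [u, t] S := by
    refine List.subperm_of_subset (by simp [hne]) ?_
    intro x hx
    rcases List.mem_cons.mp hx with rfl | hx
    · exact hu
    · rcases List.mem_cons.mp hx with rfl | hx
      · exact ht
      · cases hx
  have := List.Subperm.countP_le (fun v => memc v p) hsub
  have h2' : ([u, t].countP fun v => memc v p) = 2 := by simp [h1, h2]
  unfold cnt
  omega

lemma sum_map_b2n {α : Type} (l : List α) (q : α → Bool) :
    (l.map fun t => b2n (q t)).sum = l.countP q := by
  unfold b2n
  induction l with
  | nil => simp
  | cons a t ih =>
    cases h : q a <;> simp [List.countP_cons, h, ih, Nat.add_comm]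

lemma countP_split {α : Type} (l : List α) (q b : α → Bool) :
    l.countP (fun u => q u && !(b u)) + l.countP (fun u => q u && b u) = l.countP q := by
  induction l with
  | nil => simp
  | cons a t ih =>
    simp only [List.countP_cons]
    cases h1 : q a <;> cases h2 : b a <;> simp [h1, h2] <;> omega


-- ---------- the fragment set a stored cube is replaced by ----------

def shape6 (u : List Int) : Prop := ∃ a b c d e f, u = [a,b,c,d,e,f]

def fdiff (t c : List Int) : List (List Int) :=
  PySem.Set.diff (fracture_by t c) (fracture_by c t)

lemma nodup_fdiff {t c : List Int} (ht : shape6 t) (hc : shape6 c)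
    (hov : cube_overlaps t c = true) : (fdiff t c).Nodup := by
  obtain ⟨a0,a1,a2,a3,a4,a5,rfl⟩ := ht
  obtain ⟨b0,b1,b2,b3,b4,b5,rfl⟩ := hc
  exact PySem.Set.nodup_diff _ _ (nodup_fracture _ _ _ _ _ _ _ _ _ _ _ _ hov)

lemma shape_mem_fdiff {t c u : List Int} (ht : shape6 t) (hc : shape6 c)
    (hov : cube_overlaps t c = true) (hu : u ∈ fdiff t c) : shape6 u := by
  obtain ⟨a0,a1,a2,a3,a4,a5,rfl⟩ := ht
  obtain ⟨b0,b1,b2,b3,b4,b5,rfl⟩ := hc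
  have := (PySem.Set.mem_diff ..).mp hu
  obtain ⟨w, _, _, _, _, rfl⟩ := (mem_fracture_iff _ _ _ _ _ _ _ _ _ _ _ _ _ hov).mp this.1
  exact ⟨_, _, _, _, _, _, rfl⟩

lemma fdiff_memT {t c u : List Int} {p : Int × Int × Int} (ht : shape6 t) (hc : shape6 c)
    (hov : cube_overlaps t c = true) (hu : u ∈ fdiff t c) (hp : memc u p = true) :
    memc t p = true := by
  obtain ⟨a0,a1,a2,a3,a4,a5,rfl⟩ := ht
  obtain ⟨b0,b1,b2,b3,b4,b5,rfl⟩ := hc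
  have := (PySem.Set.mem_diff ..).mp hu
  exact memc_of_mem_fracture _ _ _ _ _ _ _ _ _ _ _ _ _ _ hov this.1 hp

lemma fdiff_not_c {t c u : List Int} {p : Int × Int × Int} (ht : shape6 t) (hc : shape6 c)
    (hov : cube_overlaps t c = true) (hu : u ∈ fdiff t c) (hp : memc u p = true)
    (hpc : memc c p = true) : False := by
  obtain ⟨a0,a1,a2,a3,a4,a5,rfl⟩ := ht
  obtain ⟨b0,b1,b2,b3,b4,b5,rfl⟩ := hc
  have hd := (PySem.Set.mem_diff ..).mp hu
  exact hd.2 (mem_fracture_swap _ _ _ _ _ _ _ _ _ _ _ _ _ _ hov hd.1 hp hpc)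

lemma count_fdiff {t c : List Int} (p : Int × Int × Int) (ht : shape6 t) (hc : shape6 c)
    (hov : cube_overlaps t c = true) :
    (fdiff t c).countP (fun u => memc u p) = b2n (memc t p && !(memc c p)) := by
  obtain ⟨a0,a1,a2,a3,a4,a5,rfl⟩ := ht
  obtain ⟨b0,b1,b2,b3,b4,b5,rfl⟩ := hc
  have hov' : cube_overlaps [b0,b1,b2,b3,b4,b5] [a0,a1,a2,a3,a4,a5] = true := by
    rw [← cube_overlaps_comm]; exact hov
  unfold fdiff
  rw [diff_eq_filter, List.countP_filter]
  cases hm : memc [b0,b1,b2,b3,b4,b5] p with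
  | true =>
    rw [List.countP_eq_zero.mpr ?_]
    · simp [hm, b2n]
    · intro u hu
      cases hp : memc u p with
      | false => simp [hp]
      | true =>
        have : u ∈ fracture_by [b0,b1,b2,b3,b4,b5] [a0,a1,a2,a3,a4,a5] :=
          mem_fracture_swap _ _ _ _ _ _ _ _ _ _ _ _ _ _ hov hu hp hm
        simp [hp, PySem.Set.contains_iff, this]
  | false =>
    have hcong : ∀ u ∈ fracture_by [a0,a1,a2,a3,a4,a5] [b0,b1,b2,b3,b4,b5],
        ((memc u p && !(PySem.Set.contains (fracture_by [b0,b1,b2,b3,b4,b5] [a0,a1,a2,a3,a4,a5]) u)) = true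
          ↔ memc u p = true) := by
      intro u hu
      cases hp : memc u p with
      | false => simp [hp]
      | true =>
        have hni : u ∉ fracture_by [b0,b1,b2,b3,b4,b5] [a0,a1,a2,a3,a4,a5] := by
          intro hin
          have := memc_of_mem_fracture _ _ _ _ _ _ _ _ _ _ _ _ _ _ hov' hin hp
          rw [this] at hm; cases hm
        simp [hp, PySem.Set.contains_iff, hni]
    rw [List.countP_congr hcong, fracture_countP _ _ _ _ _ _ _ _ _ _ _ _ _ hov]
    simp [hm]

lemma overlap_of_mem' {u c : List Int} {p : Int × Int × Int} (hu : shape6 u) (hc : shape6 c)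
    (h1 : memc u p = true) (h2 : memc c p = true) : cube_overlaps u c = true := by
  obtain ⟨a0,a1,a2,a3,a4,a5,rfl⟩ := hu
  obtain ⟨b0,b1,b2,b3,b4,b5,rfl⟩ := hc
  exact overlap_of_mem _ _ _ _ _ _ _ _ _ _ _ _ _ h1 h2

-- ---------- the A-step fold in closed form ----------

def updIf (c : List Int) (s : PySem.Set (List Int)) (t : List Int) : PySem.Set (List Int) :=
  if cube_overlaps t c then PySem.Set.update s (fdiff t c) else s

def addIf (c : List Int) (s : PySem.Set (List Int)) (t : List Int) : PySem.Set (List Int) :=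
  if cube_overlaps t c then PySem.Set.add s t else s

lemma stepA_fold_eq (c : List Int) (S : List (List Int)) (ta0 : List (List Int))
    (hnd : S.Nodup) :
    S.foldl (fun (p : PySem.Set (List Int) × PySem.Set (List Int)) t =>
        if !cube_overlaps t c then p
        else (PySem.Set.update p.1 (PySem.Set.diff (fracture_by t c) (fracture_by c t)),
              PySem.Set.add p.2 t)) (ta0, PySem.Set.empty)
      = ((S.filter (fun t => cube_overlaps t c)).foldl
          (fun s t => PySem.Set.update s (fdiff t c)) ta0,
         S.filter (fun t => cube_overlaps t c)) := by
  have h1 : S.foldl (fun (p : PySem.Set (List Int) × PySem.Set (List Int)) t =>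
        if !cube_overlaps t c then p
        else (PySem.Set.update p.1 (PySem.Set.diff (fracture_by t c) (fracture_by c t)),
              PySem.Set.add p.2 t)) (ta0, PySem.Set.empty)
      = S.foldl (fun (p : PySem.Set (List Int) × PySem.Set (List Int)) t =>
          (updIf c p.1 t, addIf c p.2 t)) (ta0, PySem.Set.empty) := by
    apply PySem.List.foldl_congr_mem
    intro acc t _
    cases h : cube_overlaps t c <;> simp [h, fdiff, updIf, addIf]
  rw [h1, PySem.List.foldl_prod_mk]
  refine Prod.ext ?_ ?_
  · show List.foldl (fun (s : PySem.Set (List Int)) t =>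
        if cube_overlaps t c then PySem.Set.update s (fdiff t c) else s) ta0 S
      = List.foldl (fun s t => PySem.Set.update s (fdiff t c)) ta0
          (S.filter (fun t => cube_overlaps t c))
    exact PySem.List.foldl_if_eq_foldl_filter _ _ _ _
  · show List.foldl (fun (s : PySem.Set (List Int)) t =>
        if cube_overlaps t c then PySem.Set.add s t else s) PySem.Set.empty S
      = S.filter (fun t => cube_overlaps t c)
    rw [PySem.List.foldl_if_eq_foldl_filter]
    have h2 : (S.filter (fun t => cube_overlaps t c)).foldl PySem.Set.add PySem.Set.empty
        = PySem.Set.update ([] : List (List Int)) (S.filter (fun t => cube_overlaps t c)) := rfl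
    rw [h2, PySem.Set.update_nil_left]
    exact PySem.Set.ofList_eq_self_of_nodup _ (List.Nodup.filter _ hnd)

-- ---------- the A step preserves the counting invariant ----------

lemma b2n_le_one (b : Bool) : b2n b ≤ 1 := by cases b <;> simp [b2n]

lemma stepA_core (is_on : Bool) (x0 x1 y0 y1 z0 z1 : Int) (S : List (List Int))
    (r : Int × Int × Int → Bool) (ta0 : List (List Int))
    (hnd : S.Nodup) (hsh : ∀ u ∈ S, shape6 u) (hcnt : ∀ p, cnt S p = b2n (r p))
    (hta0 : ta0 = if is_on then [[x0,x1,y0,y1,z0,z1]] else []) :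
    (PySem.Set.update
        (PySem.Set.diff S (S.filter (fun t => cube_overlaps t [x0,x1,y0,y1,z0,z1])))
        ((S.filter (fun t => cube_overlaps t [x0,x1,y0,y1,z0,z1])).foldl
          (fun s t => PySem.Set.update s (fdiff t [x0,x1,y0,y1,z0,z1])) ta0)).Nodup ∧
    (∀ u ∈ PySem.Set.update
        (PySem.Set.diff S (S.filter (fun t => cube_overlaps t [x0,x1,y0,y1,z0,z1])))
        ((S.filter (fun t => cube_overlaps t [x0,x1,y0,y1,z0,z1])).foldl
          (fun s t => PySem.Set.update s (fdiff t [x0,x1,y0,y1,z0,z1])) ta0), shape6 u) ∧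
    (∀ p, cnt (PySem.Set.update
        (PySem.Set.diff S (S.filter (fun t => cube_overlaps t [x0,x1,y0,y1,z0,z1])))
        ((S.filter (fun t => cube_overlaps t [x0,x1,y0,y1,z0,z1])).foldl
          (fun s t => PySem.Set.update s (fdiff t [x0,x1,y0,y1,z0,z1])) ta0)) p
      = b2n (if is_on then r p || memc [x0,x1,y0,y1,z0,z1] p
             else r p && !memc [x0,x1,y0,y1,z0,z1] p)) := by
  set c : List Int := [x0,x1,y0,y1,z0,z1] with hcdef
  have hcsh : shape6 c := ⟨x0,x1,y0,y1,z0,z1, rfl⟩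
  set tr : List (List Int) := S.filter (fun t => cube_overlaps t c) with htrdef
  set ta : List (List Int) := tr.foldl (fun s t => PySem.Set.update s (fdiff t c)) ta0 with htadef
  have htrmem : ∀ t, t ∈ tr ↔ t ∈ S ∧ cube_overlaps t c = true := by
    intro t; rw [htrdef, List.mem_filter]
  have htrnd : tr.Nodup := List.Nodup.filter _ hnd
  have hta0nd : ta0.Nodup := by rw [hta0]; cases is_on <;> simp
  have hta0mem : ∀ u ∈ ta0, u = c ∧ is_on = true := by
    rw [hta0]; cases is_on <;> intro u hu <;> simp at hu <;> simp [hu]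
  have hgnd : ∀ t ∈ tr, (fdiff t c).Nodup := fun t ht =>
    nodup_fdiff (hsh t ((htrmem t).mp ht).1) hcsh ((htrmem t).mp ht).2
  have htand : ta.Nodup := nodup_foldl_update _ _ _ hta0nd
  have htamem : ∀ u, u ∈ ta ↔ u ∈ ta0 ∨ ∃ t ∈ tr, u ∈ fdiff t c := fun u =>
    mem_foldl_update tr _ ta0 u
  refine ⟨PySem.Set.nodup_update _ _ (PySem.Set.nodup_diff _ _ hnd), ?_, ?_⟩
  · intro u hu
    rw [PySem.Set.mem_update] at hu
    rcases hu with hu | hu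
    · exact hsh u ((PySem.Set.mem_diff ..).mp hu).1
    · rcases (htamem u).mp hu with hu0 | ⟨t, ht, hu'⟩
      · exact (hta0mem u hu0).1 ▸ hcsh
      · exact shape_mem_fdiff (hsh t ((htrmem t).mp ht).1) hcsh ((htrmem t).mp ht).2 hu'
  · intro p
    by_cases hm : memc c p = true
    · -- p lies in the new cube: only the (possible) copy of c counts
      have hdZ : cnt (PySem.Set.diff S tr) p = 0 := by
        apply List.countP_eq_zero.mpr
        intro u hu
        have hu' := (PySem.Set.mem_diff ..).mp hu
        simp only [Bool.not_eq_true]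
        cases hp : memc u p with
        | false => rfl
        | true =>
          exact absurd ((htrmem u).mpr ⟨hu'.1, overlap_of_mem' (hsh u hu'.1) hcsh hp hm⟩)
            hu'.2
      have hpieceF : ∀ t ∈ tr, ∀ u ∈ fdiff t c, memc u p = true → False := fun t ht u hu hp =>
        fdiff_not_c (hsh t ((htrmem t).mp ht).1) hcsh ((htrmem t).mp ht).2 hu hp hm
      have htaC : cnt ta p = cnt ta0 p := by
        rw [htadef, cnt_foldl_update _ p tr ta0 htrnd hgnd hta0nd
          (fun t ht u hu hp => ((hpieceF t ht u hu hp).elim))]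
        have hz : ∀ t ∈ tr, cnt (fdiff t c) p = 0 := fun t ht =>
          List.countP_eq_zero.mpr (fun u hu => by
            simp only [Bool.not_eq_true]
            cases hp : memc u p with
            | false => rfl
            | true => exact (hpieceF t ht u hu hp).elim)
        rw [List.map_congr_left hz]
        simp
      have hta0C : cnt ta0 p = b2n is_on := by
        rw [hta0]; cases is_on <;> simp [cnt, b2n, hm]
      have hfin : cnt (PySem.Set.update (PySem.Set.diff S tr) ta) p
          = cnt (PySem.Set.diff S tr) p + cnt ta p := by
        apply cnt_update _ _ _ htand
        intro u hu hp
        rcases (htamem u).mp hu with hu0 | ⟨t, ht, hu'⟩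
        · obtain ⟨rfl, _⟩ := hta0mem u hu0
          intro hin
          have hin' := (PySem.Set.mem_diff ..).mp hin
          exact hin'.2 ((htrmem c).mpr ⟨hin'.1, overlap_of_mem' hcsh hcsh hp hm⟩)
        · exact (hpieceF t ht u hu' hp).elim
      rw [hfin, hdZ, htaC, hta0C]
      cases is_on <;> simp [hm, b2n]
    · -- p outside the new cube: the count is preserved
      have hm' : memc c p = false := by
        cases hmv : memc c p
        · rfl
        · exact absurd hmv hm
      have hle1 : cnt S p ≤ 1 := by rw [hcnt p]; exact b2n_le_one _
      have huniq : ∀ t ∈ S, ∀ t' ∈ S, memc t p = true → memc t' p = true → t = t' := by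
        intro t ht t' ht' h1 h2
        by_contra hne
        exact absurd (two_le_cnt ht' ht (fun h => hne h.symm) h2 h1) (by omega)
      have hdV : cnt (PySem.Set.diff S tr) p
          = S.countP (fun u => memc u p && !(cube_overlaps u c)) := by
        unfold cnt
        rw [diff_eq_filter, List.countP_filter]
        apply List.countP_congr
        intro u hu
        have hcont : PySem.Set.contains tr u = cube_overlaps u c := by
          cases hov : cube_overlaps u c with
          | true => exact (PySem.Set.contains_iff tr u).mpr ((htrmem u).mpr ⟨hu, hov⟩)
          | false =>
            cases hcv : PySem.Set.contains tr u with
            | false => rfl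
            | true =>
              have := ((htrmem u).mp ((PySem.Set.contains_iff tr u).mp hcv)).2
              rw [this] at hov; cases hov
        rw [hcont]
      have hpieceV : ∀ t ∈ tr, cnt (fdiff t c) p = b2n (memc t p) := by
        intro t ht
        have : cnt (fdiff t c) p = (fdiff t c).countP (fun u => memc u p) := rfl
        rw [this, count_fdiff p (hsh t ((htrmem t).mp ht).1) hcsh ((htrmem t).mp ht).2, hm']
        simp
      have htaV : cnt ta p = S.countP (fun u => memc u p && cube_overlaps u c) := by
        rw [htadef, cnt_foldl_update _ p tr ta0 htrnd hgnd hta0nd ?_]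
        · have h0 : cnt ta0 p = 0 := by
            rw [hta0]; cases is_on <;> simp [cnt, hm']
          rw [h0, List.map_congr_left hpieceV, sum_map_b2n, htrdef, List.countP_filter]
          simp
        · intro t ht u hu hp
          constructor
          · intro hu0
            obtain ⟨rfl, _⟩ := hta0mem u hu0
            rw [hp] at hm'; cases hm'
          · intro t' ht' hne hu'
            have h1 : memc t p = true :=
              fdiff_memT (hsh t ((htrmem t).mp ht).1) hcsh ((htrmem t).mp ht).2 hu hp
            have h2 : memc t' p = true :=
              fdiff_memT (hsh t' ((htrmem t').mp ht').1) hcsh ((htrmem t').mp ht').2 hu' hp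
            exact hne (huniq t' ((htrmem t').mp ht').1 t ((htrmem t).mp ht).1 h2 h1)
      have hfin : cnt (PySem.Set.update (PySem.Set.diff S tr) ta) p
          = cnt (PySem.Set.diff S tr) p + cnt ta p := by
        apply cnt_update _ _ _ htand
        intro u hu hp
        rcases (htamem u).mp hu with hu0 | ⟨t, ht, hu'⟩
        · obtain ⟨rfl, _⟩ := hta0mem u hu0
          rw [hp] at hm'; cases hm'
        · intro hin
          have hin' := (PySem.Set.mem_diff ..).mp hin
          have hT : memc t p = true :=
            fdiff_memT (hsh t ((htrmem t).mp ht).1) hcsh ((htrmem t).mp ht).2 hu' hp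
          by_cases heq : u = t
          · exact hin'.2 (heq ▸ ht)
          · exact absurd (two_le_cnt hin'.1 ((htrmem t).mp ht).1 heq hp hT) (by omega)
      rw [hfin, hdV, htaV, countP_split]
      have : S.countP (fun u => memc u p) = cnt S p := rfl
      rw [this, hcnt p]
      cases is_on <;> simp [hm']

lemma stepA_inv (filt is_on : Bool) (x0 x1 y0 y1 z0 z1 : Int) (S : List (List Int))
    (r : Int × Int × Int → Bool)
    (hnd : S.Nodup) (hsh : ∀ u ∈ S, shape6 u) (hcnt : ∀ p, cnt S p = b2n (r p)) :
    (stepA filt S (is_on, [x0,x1,y0,y1,z0,z1])).Nodup ∧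
    (∀ u ∈ stepA filt S (is_on, [x0,x1,y0,y1,z0,z1]), shape6 u) ∧
    (∀ p, cnt (stepA filt S (is_on, [x0,x1,y0,y1,z0,z1])) p
      = b2n (regStep filt r (is_on, [x0,x1,y0,y1,z0,z1]) p)) := by
  unfold stepA regStep
  by_cases hskip : (filt && !(decide (-50 ≤ pvGet [x0,x1,y0,y1,z0,z1] 0)
      && decide (pvGet [x0,x1,y0,y1,z0,z1] 0 ≤ 50))) = true
  · simp only [hskip, if_true]
    exact ⟨hnd, hsh, hcnt⟩
  · simp only [hskip, if_false, Bool.false_eq_true]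
    cases is_on with
    | true =>
      simp only [if_true]
      rw [stepA_fold_eq _ _ _ hnd]
      have hofl : PySem.Set.ofList [[x0,x1,y0,y1,z0,z1]] = [[x0,x1,y0,y1,z0,z1]] := rfl
      rw [hofl]
      have := stepA_core true x0 x1 y0 y1 z0 z1 S r [[x0,x1,y0,y1,z0,z1]] hnd hsh hcnt rfl
      simpa using this
    | false =>
      simp only [Bool.false_eq_true, if_false]
      rw [stepA_fold_eq _ _ _ hnd]
      have := stepA_core false x0 x1 y0 y1 z0 z1 S r [] hnd hsh hcnt rfl
      simpa using this


-- ---------- the B step preserves the signed-sum invariant ----------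

def boxpos (b : Int × Int × Int × Int × Int × Int) : Prop :=
  b.1 < b.2.1 ∧ b.2.2.1 < b.2.2.2.1 ∧ b.2.2.2.2.1 < b.2.2.2.2.2

lemma sgn_append (A B : List (Int × (Int × Int × Int × Int × Int × Int))) (p : Int × Int × Int) :
    sgn (A ++ B) p = sgn A p + sgn B p := by
  unfold sgn
  rw [List.map_append, List.sum_append]

lemma exists_six {l : List Int} (h : l.length = 6) :
    ∃ a b c d e f : Int, l = [a,b,c,d,e,f] := by
  match l, h with
  | [a,b,c,d,e,f], _ => exact ⟨a,b,c,d,e,f, rfl⟩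

lemma stepB_inv (filt is_on : Bool) (x0 x1 y0 y1 z0 z1 : Int)
    (L : List (Int × (Int × Int × Int × Int × Int × Int))) (r : Int × Int × Int → Bool)
    (hpos : ∀ sc ∈ L, boxpos sc.2) (hsgn : ∀ p, sgn L p = b2i (r p)) :
    (∀ sc ∈ altStep filt L (is_on, [x0,x1,y0,y1,z0,z1]), boxpos sc.2) ∧
    (∀ p, sgn (altStep filt L (is_on, [x0,x1,y0,y1,z0,z1])) p
      = b2i (regStep filt r (is_on, [x0,x1,y0,y1,z0,z1]) p)) := by
  unfold altStep regStep
  simp only [pvGet_six_zero, pvGet_six_one, pvGet_six_two, pvGet_six_three,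
    pvGet_six_four, pvGet_six_five]
  by_cases hskip : (filt && !(decide (-50 ≤ x0) && decide (x0 ≤ 50))) = true
  · simp only [hskip, if_true]
    exact ⟨hpos, hsgn⟩
  · simp only [hskip, Bool.false_eq_true, if_false]
    have hnegs : L.foldl (fun negs sc =>
          if decide (max sc.2.1 x0 < min sc.2.2.1 x1) &&
             decide (max sc.2.2.2.1 y0 < min sc.2.2.2.2.1 y1) &&
             decide (max sc.2.2.2.2.2.1 z0 < min sc.2.2.2.2.2.2 z1) then
            negs ++ [(-sc.1, (max sc.2.1 x0, min sc.2.2.1 x1, max sc.2.2.2.1 y0,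
              min sc.2.2.2.2.1 y1, max sc.2.2.2.2.2.1 z0, min sc.2.2.2.2.2.2 z1))]
          else negs) []
        = ((L.filter (fun sc =>
            decide (max sc.2.1 x0 < min sc.2.2.1 x1) &&
            decide (max sc.2.2.2.1 y0 < min sc.2.2.2.2.1 y1) &&
            decide (max sc.2.2.2.2.2.1 z0 < min sc.2.2.2.2.2.2 z1))).map (fun sc =>
              (-sc.1, (max sc.2.1 x0, min sc.2.2.1 x1, max sc.2.2.2.1 y0,
                min sc.2.2.2.2.1 y1, max sc.2.2.2.2.2.1 z0, min sc.2.2.2.2.2.2 z1)))) := by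
      have := PySem.List.foldl_append_if (l := L)
        (p := fun sc : Int × (Int × Int × Int × Int × Int × Int) =>
          decide (max sc.2.1 x0 < min sc.2.2.1 x1) &&
          decide (max sc.2.2.2.1 y0 < min sc.2.2.2.2.1 y1) &&
          decide (max sc.2.2.2.2.2.1 z0 < min sc.2.2.2.2.2.2 z1))
        (f := fun sc : Int × (Int × Int × Int × Int × Int × Int) =>
          (-sc.1, (max sc.2.1 x0, min sc.2.2.1 x1, max sc.2.2.2.1 y0,
            min sc.2.2.2.2.1 y1, max sc.2.2.2.2.2.1 z0, min sc.2.2.2.2.2.2 z1)))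
        (acc := [])
      simpa using this
    rw [hnegs]
    constructor
    · intro sc hsc
      cases hbr : (is_on && decide (x0 < x1) && decide (y0 < y1) && decide (z0 < z1)) with
      | false =>
        rw [hbr] at hsc
        simp only [Bool.false_eq_true, if_false, List.mem_append] at hsc
        rcases hsc with h | h
        · exact hpos sc h
        · simp only [List.mem_map, List.mem_filter] at h
          obtain ⟨sc', ⟨_, hq⟩, rfl⟩ := h
          simp only [Bool.and_eq_true, decide_eq_true_eq] at hq
          exact ⟨hq.1.1, hq.1.2, hq.2⟩
      | true =>
        rw [hbr] at hsc
        simp only [if_true, List.mem_append] at hsc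
        rcases hsc with (h | h) | h
        · exact hpos sc h
        · simp only [List.mem_map, List.mem_filter] at h
          obtain ⟨sc', ⟨_, hq⟩, rfl⟩ := h
          simp only [Bool.and_eq_true, decide_eq_true_eq] at hq
          exact ⟨hq.1.1, hq.1.2, hq.2⟩
        · simp only [List.mem_singleton] at h
          subst h
          simp only [Bool.and_eq_true, decide_eq_true_eq] at hbr
          exact ⟨hbr.1.1.2, hbr.1.2, hbr.2⟩
    · intro p
      obtain ⟨px, py, pz⟩ := p
      have hnegsum : sgn ((L.filter (fun sc =>
            decide (max sc.2.1 x0 < min sc.2.2.1 x1) &&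
            decide (max sc.2.2.2.1 y0 < min sc.2.2.2.2.1 y1) &&
            decide (max sc.2.2.2.2.2.1 z0 < min sc.2.2.2.2.2.2 z1))).map (fun sc =>
              (-sc.1, (max sc.2.1 x0, min sc.2.2.1 x1, max sc.2.2.2.1 y0,
                min sc.2.2.2.2.1 y1, max sc.2.2.2.2.2.1 z0, min sc.2.2.2.2.2.2 z1))))
            (px, py, pz)
          = (if memc [x0,x1,y0,y1,z0,z1] (px, py, pz) = true
              then -(sgn L (px, py, pz)) else 0) := by
        clear hpos hsgn hnegs
        induction L with
        | nil => simp [sgn]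
        | cons a t ih =>
          obtain ⟨sgn0, a0, a1, b0, b1, c0, c1⟩ := a
          rw [List.filter_cons]
          have hcons : ∀ (s : Int) (b : Int × Int × Int × Int × Int × Int)
              (M : List (Int × (Int × Int × Int × Int × Int × Int))),
              sgn ((s, b) :: M) (px, py, pz)
                = (if membox b (px, py, pz) = true then s else 0) + sgn M (px, py, pz) := by
            intro s b M; simp [sgn]
          by_cases hq : (decide (max a0 x0 < min a1 x1) && decide (max b0 y0 < min b1 y1) &&
              decide (max c0 z0 < min c1 z1)) = true
          · rw [if_pos hq]
            simp only [List.map_cons]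
            rw [hcons, hcons, ih]
            simp only [Bool.and_eq_true, decide_eq_true_eq] at hq
            simp only [memc_six, membox, Bool.and_eq_true, decide_eq_true_eq]
            split_ifs <;> omega
          · rw [if_neg hq]
            rw [hcons, ih]
            simp only [Bool.and_eq_true, decide_eq_true_eq] at hq
            simp only [memc_six, membox, Bool.and_eq_true, decide_eq_true_eq]
            split_ifs <;> omega
      cases hbr : (is_on && decide (x0 < x1) && decide (y0 < y1) && decide (z0 < z1)) with
      | false =>
        simp only [hbr, Bool.false_eq_true, if_false]
        rw [sgn_append, hnegsum, hsgn]
        cases hc : memc [x0,x1,y0,y1,z0,z1] (px, py, pz) with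
        | true =>
          have hon : is_on = false := by
            cases hion : is_on
            · rfl
            · simp only [memc_six, Bool.and_eq_true, decide_eq_true_eq] at hc
              rw [hion] at hbr
              simp only [Bool.true_and, Bool.and_eq_false_iff, decide_eq_false_iff_not] at hbr
              omega
          rw [hon]
          simp only [hc, if_pos, Bool.false_eq_true, if_false]
          cases hr : r (px, py, pz) <;> simp [b2i]
        | false =>
          simp only [hc, Bool.false_eq_true, if_false]
          cases is_on <;> cases hr : r (px, py, pz) <;> simp [b2i]
      | true =>
        have hion : is_on = true := by
          simp only [Bool.and_eq_true] at hbr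
          exact hbr.1.1.1
        simp only [hbr, if_true, hion]
        rw [sgn_append, sgn_append, hnegsum, hsgn]
        have hone : sgn [(1, (x0, x1, y0, y1, z0, z1))] (px, py, pz)
            = if memc [x0,x1,y0,y1,z0,z1] (px, py, pz) = true then 1 else 0 := by
          simp only [sgn, List.map_cons, List.map_nil, List.sum_cons, List.sum_nil,
            membox, memc_six]
          norm_num
        rw [hone]
        cases hc : memc [x0,x1,y0,y1,z0,z1] (px, py, pz) with
        | true =>
          simp only [hc, if_pos]
          cases hr : r (px, py, pz) <;> simp [b2i]
        | false =>
          simp only [hc, Bool.false_eq_true, if_false]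
          cases hr : r (px, py, pz) <;> simp [b2i]


-- ---------- from pointwise counts to volumes: summing over a finite grid ----------

def gridI (M : Int) : Finset Int := (Finset.range (2*M+1).toNat).image (fun n : ℕ => (n : Int) - M)

lemma mem_gridI {M x : Int} : x ∈ gridI M ↔ -M ≤ x ∧ x ≤ M := by
  simp only [gridI, Finset.mem_image]
  constructor
  · rintro ⟨n, hn, rfl⟩
    simp only [Finset.mem_range] at hn
    omega
  · intro h
    exact ⟨(x + M).toNat, by simp only [Finset.mem_range]; omega, by omega⟩

def grid (M : Int) : Finset (Int × Int × Int) := gridI M ×ˢ (gridI M ×ˢ gridI M)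

lemma axis_sum (a b M : Int) (hbnd : a < b → (-M ≤ a ∧ b ≤ M)) :
    (∑ x ∈ gridI M, (if a ≤ x ∧ x < b then (1:Int) else 0)) = max 0 (b - a) := by
  by_cases hab : a < b
  · have hfil : (gridI M).filter (fun x => a ≤ x ∧ x < b) = Finset.Ico a b := by
      apply Finset.ext
      intro x
      simp only [Finset.mem_filter, mem_gridI, Finset.mem_Ico]
      have := hbnd hab
      omega
    have h1 : (∑ x ∈ gridI M, (if a ≤ x ∧ x < b then (1:Int) else 0))
        = ∑ x ∈ (gridI M).filter (fun x => a ≤ x ∧ x < b), (1:Int) :=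
      (Finset.sum_filter _ _).symm
    rw [h1, hfil, Finset.sum_const, Int.card_Ico]
    simp only [nsmul_eq_mul, mul_one]
    omega
  · have hz : ∀ x ∈ gridI M, (if a ≤ x ∧ x < b then (1:Int) else 0) = 0 := by
      intro x _
      rw [if_neg (by omega)]
    rw [Finset.sum_congr rfl hz, Finset.sum_const_zero]
    omega

lemma ite_and_mul (A B C : Prop) [Decidable A] [Decidable B] [Decidable C] :
    (if A ∧ B ∧ C then (1:Int) else 0)
      = (if A then (1:Int) else 0) * ((if B then (1:Int) else 0) * (if C then (1:Int) else 0)) := by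
  by_cases hA : A <;> by_cases hB : B <;> by_cases hC : C <;> simp [hA, hB, hC]

lemma box_sum (a0 a1 b0 b1 c0 c1 M : Int)
    (hb : ∀ v ∈ [a0,a1,b0,b1,c0,c1], |v| < M) :
    (∑ p ∈ grid M, (if (a0 ≤ p.1 ∧ p.1 < a1) ∧ (b0 ≤ p.2.1 ∧ p.2.1 < b1) ∧
        (c0 ≤ p.2.2 ∧ p.2.2 < c1) then (1:Int) else 0))
      = max 0 (a1 - a0) * (max 0 (b1 - b0) * max 0 (c1 - c0)) := by
  have hsum := Finset.sum_product' (s := gridI M) (t := gridI M ×ˢ gridI M)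
    (f := fun x q => if (a0 ≤ x ∧ x < a1) ∧ (b0 ≤ q.1 ∧ q.1 < b1) ∧
        (c0 ≤ q.2 ∧ q.2 < c1) then (1:Int) else 0)
  rw [show grid M = gridI M ×ˢ (gridI M ×ˢ gridI M) from rfl]
  rw [hsum]
  have hinner := fun x => Finset.sum_product' (s := gridI M) (t := gridI M)
    (f := fun y z => if (a0 ≤ x ∧ x < a1) ∧ (b0 ≤ y ∧ y < b1) ∧
        (c0 ≤ z ∧ z < c1) then (1:Int) else 0)
  calc (∑ x ∈ gridI M, ∑ q ∈ gridI M ×ˢ gridI M,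
      (if (a0 ≤ x ∧ x < a1) ∧ (b0 ≤ q.1 ∧ q.1 < b1) ∧ (c0 ≤ q.2 ∧ q.2 < c1)
        then (1:Int) else 0))
      = ∑ x ∈ gridI M, ((if a0 ≤ x ∧ x < a1 then (1:Int) else 0) *
          ((∑ y ∈ gridI M, (if b0 ≤ y ∧ y < b1 then (1:Int) else 0)) *
           (∑ z ∈ gridI M, (if c0 ≤ z ∧ z < c1 then (1:Int) else 0)))) := by
        apply Finset.sum_congr rfl
        intro x _
        rw [hinner x]
        have hfac : ∀ y ∈ gridI M, ∀ z ∈ gridI M,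
            (if (a0 ≤ x ∧ x < a1) ∧ (b0 ≤ y ∧ y < b1) ∧ (c0 ≤ z ∧ z < c1)
              then (1:Int) else 0)
            = ((if a0 ≤ x ∧ x < a1 then (1:Int) else 0) * (if b0 ≤ y ∧ y < b1 then (1:Int) else 0))
                * (if c0 ≤ z ∧ z < c1 then (1:Int) else 0) := by
          intro y _ z _
          rw [ite_and_mul]
          ring
        rw [Finset.sum_congr rfl (fun y hy => Finset.sum_congr rfl (fun z hz => hfac y hy z hz))]
        rw [← Finset.sum_mul_sum]
        rw [← Finset.mul_sum]
        ring
    _ = max 0 (a1 - a0) * (max 0 (b1 - b0) * max 0 (c1 - c0)) := by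
        rw [← Finset.sum_mul, axis_sum a0 a1 M ?_, axis_sum b0 b1 M ?_, axis_sum c0 c1 M ?_]
        all_goals
          intro h
          have h1 := abs_lt.mp (hb a0 (by simp))
          have h2 := abs_lt.mp (hb a1 (by simp))
          have h3 := abs_lt.mp (hb b0 (by simp))
          have h4 := abs_lt.mp (hb b1 (by simp))
          have h5 := abs_lt.mp (hb c0 (by simp))
          have h6 := abs_lt.mp (hb c1 (by simp))
          omega


-- ---------- volumes as grid sums ----------

lemma vol_eq (a0 a1 b0 b1 c0 c1 M : Int) (hb : ∀ v ∈ [a0,a1,b0,b1,c0,c1], |v| < M) :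
    volume [a0,a1,b0,b1,c0,c1]
      = ∑ p ∈ grid M, (if memc [a0,a1,b0,b1,c0,c1] p = true then (1:Int) else 0) := by
  have h1 : ∀ p : Int × Int × Int, (if memc [a0,a1,b0,b1,c0,c1] p = true then (1:Int) else 0)
      = (if (a0 ≤ p.1 ∧ p.1 < a1) ∧ (b0 ≤ p.2.1 ∧ p.2.1 < b1) ∧
          (c0 ≤ p.2.2 ∧ p.2.2 < c1) then (1:Int) else 0) := by
    intro p
    by_cases hA : (a0 ≤ p.1 ∧ p.1 < a1) <;> by_cases hB : (b0 ≤ p.2.1 ∧ p.2.1 < b1) <;>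
      by_cases hC : (c0 ≤ p.2.2 ∧ p.2.2 < c1) <;> simp [memc_six, hA, hB, hC]
  rw [Finset.sum_congr rfl (fun p _ => h1 p), box_sum _ _ _ _ _ _ _ hb]
  simp only [volume, pvGet_six_zero, pvGet_six_one, pvGet_six_two, pvGet_six_three,
    pvGet_six_four, pvGet_six_five]
  ring

lemma boxvol_eq (a0 a1 b0 b1 c0 c1 M : Int) (hb : ∀ v ∈ [a0,a1,b0,b1,c0,c1], |v| < M)
    (hpos : a0 < a1 ∧ b0 < b1 ∧ c0 < c1) :
    (∑ p ∈ grid M, (if membox (a0,a1,b0,b1,c0,c1) p = true then (1:Int) else 0))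
      = (a1 - a0) * ((b1 - b0) * (c1 - c0)) := by
  have h1 : ∀ p : Int × Int × Int, (if membox (a0,a1,b0,b1,c0,c1) p = true then (1:Int) else 0)
      = (if (a0 ≤ p.1 ∧ p.1 < a1) ∧ (b0 ≤ p.2.1 ∧ p.2.1 < b1) ∧
          (c0 ≤ p.2.2 ∧ p.2.2 < c1) then (1:Int) else 0) := by
    intro p
    by_cases hA : (a0 ≤ p.1 ∧ p.1 < a1) <;> by_cases hB : (b0 ≤ p.2.1 ∧ p.2.1 < b1) <;>
      by_cases hC : (c0 ≤ p.2.2 ∧ p.2.2 < c1) <;> simp [membox, hA, hB, hC]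
  rw [Finset.sum_congr rfl (fun p _ => h1 p), box_sum _ _ _ _ _ _ _ hb]
  have e1 : max 0 (a1 - a0) = a1 - a0 := by omega
  have e2 : max 0 (b1 - b0) = b1 - b0 := by omega
  have e3 : max 0 (c1 - c0) = c1 - c0 := by omega
  rw [e1, e2, e3]

lemma sum_cnt (G : Finset (Int × Int × Int)) : ∀ (S : List (List Int)),
    (∑ p ∈ G, (cnt S p : Int))
      = (S.map (fun u => ∑ p ∈ G, (if memc u p = true then (1:Int) else 0))).sum := by
  intro S
  induction S with
  | nil => simp [cnt]
  | cons u S ih =>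
    have hstep : ∀ p, (cnt (u :: S) p : Int)
        = (if memc u p = true then (1:Int) else 0) + (cnt S p : Int) := by
      intro p
      unfold cnt
      rw [List.countP_cons]
      push_cast
      cases h : memc u p <;> simp [h] <;> ring
    rw [Finset.sum_congr rfl (fun p _ => hstep p), Finset.sum_add_distrib, ih]
    simp [List.map_cons]

lemma sum_sgn (G : Finset (Int × Int × Int)) :
    ∀ (L : List (Int × (Int × Int × Int × Int × Int × Int))),
    (∑ p ∈ G, sgn L p)
      = (L.map (fun sc => sc.1 * ∑ p ∈ G, (if membox sc.2 p = true then (1:Int) else 0))).sum := by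
  intro L
  induction L with
  | nil => simp [sgn]
  | cons sc L ih =>
    have hstep : ∀ p, sgn (sc :: L) p
        = sc.1 * (if membox sc.2 p = true then (1:Int) else 0) + sgn L p := by
      intro p
      simp only [sgn, List.map_cons, List.sum_cons]
      cases h : membox sc.2 p <;> simp [h]
    rw [Finset.sum_congr rfl (fun p _ => hstep p), Finset.sum_add_distrib, ih]
    simp only [List.map_cons, List.sum_cons]
    congr 1
    rw [← Finset.mul_sum]

-- a bound dominating every coordinate of the final states
def coordsAll (S : List (List Int)) (L : List (Int × (Int × Int × Int × Int × Int × Int))) :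
    List Int :=
  S.flatten ++ L.flatMap (fun sc =>
    [sc.2.1, sc.2.2.1, sc.2.2.2.1, sc.2.2.2.2.1, sc.2.2.2.2.2.1, sc.2.2.2.2.2.2])

def Mof (S : List (List Int)) (L : List (Int × (Int × Int × Int × Int × Int × Int))) : Int :=
  1 + ((coordsAll S L).map (fun v => |v|)).sum

lemma abs_lt_Mof {S : List (List Int)} {L : List (Int × (Int × Int × Int × Int × Int × Int))}
    {v : Int} (hv : v ∈ coordsAll S L) : |v| < Mof S L := by
  have h0 : ∀ x ∈ ((coordsAll S L).map (fun v => |v|)), 0 ≤ x := by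
    intro x hx
    obtain ⟨w, _, rfl⟩ := List.mem_map.mp hx
    exact abs_nonneg w
  have := List.single_le_sum h0 |v| (List.mem_map_of_mem hv)
  unfold Mof
  omega

lemma final_eq (S : List (List Int)) (L : List (Int × (Int × Int × Int × Int × Int × Int)))
    (hsh : ∀ u ∈ S, shape6 u) (hpos : ∀ sc ∈ L, boxpos sc.2)
    (hpt : ∀ p, (cnt S p : Int) = sgn L p) :
    (S.map volume).sum
      = (L.map (fun sc => sc.1 * (sc.2.2.1 - sc.2.1) * (sc.2.2.2.2.1 - sc.2.2.2.1) *
          (sc.2.2.2.2.2.2 - sc.2.2.2.2.2.1))).sum := by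
  have hA : (S.map volume).sum
      = (S.map (fun u => ∑ p ∈ grid (Mof S L), (if memc u p = true then (1:Int) else 0))).sum := by
    apply congrArg
    apply List.map_congr_left
    intro u hu
    obtain ⟨a0,a1,b0,b1,c0,c1, rfl⟩ := hsh u hu
    apply vol_eq
    intro v hv
    apply abs_lt_Mof
    unfold coordsAll
    rw [List.mem_append]
    exact Or.inl (List.mem_flatten.mpr ⟨_, hu, hv⟩)
  have hB : (L.map (fun sc => sc.1 * (sc.2.2.1 - sc.2.1) * (sc.2.2.2.2.1 - sc.2.2.2.1) *
        (sc.2.2.2.2.2.2 - sc.2.2.2.2.2.1))).sum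
      = (L.map (fun sc => sc.1 * ∑ p ∈ grid (Mof S L),
          (if membox sc.2 p = true then (1:Int) else 0))).sum := by
    apply congrArg
    apply List.map_congr_left
    intro sc hsc
    obtain ⟨sg, a0, a1, b0, b1, c0, c1⟩ := sc
    have hp := hpos _ hsc
    have hb : ∀ v ∈ [a0,a1,b0,b1,c0,c1], |v| < Mof S L := by
      intro v hv
      apply abs_lt_Mof
      unfold coordsAll
      rw [List.mem_append]
      refine Or.inr (List.mem_flatMap.mpr ⟨(sg, a0, a1, b0, b1, c0, c1), hsc, ?_⟩)
      simpa using hv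
    rw [boxvol_eq a0 a1 b0 b1 c0 c1 _ hb ⟨hp.1, hp.2.1, hp.2.2⟩]
    ring
  rw [hA, ← sum_cnt, hB]
  rw [← sum_sgn]
  exact Finset.sum_congr rfl (fun p _ => hpt p)

-- ---------- the joint induction over the instruction list ----------

lemma guard_of_skipB {filt : Bool} {c : List Int} (h : skipB filt c = true) :
    (filt && !(decide (-50 ≤ pvGet c 0) && decide (pvGet c 0 ≤ 50))) = true := by
  simp only [skipB, Bool.and_eq_true] at h
  simp [h.1.1, h.2]

lemma stepA_skip (filt : Bool) (S : List (List Int)) (is_on : Bool) (c : List Int)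
    (h : skipB filt c = true) : stepA filt S (is_on, c) = S := by
  unfold stepA
  rw [if_pos (guard_of_skipB h)]

lemma altStep_skip (filt : Bool) (L : List (Int × (Int × Int × Int × Int × Int × Int)))
    (is_on : Bool) (c : List Int) (h : skipB filt c = true) :
    altStep filt L (is_on, c) = L := by
  unfold altStep
  rw [if_pos (guard_of_skipB h)]

lemma stepA_off_empty (filt : Bool) (c : List Int) : stepA filt [] (false, c) = [] := by
  unfold stepA
  dsimp only
  split_ifs with h1 h2
  · rfl
  · exact h2.elim
  · rfl

lemma altStep_off_empty (filt : Bool) (c : List Int) : altStep filt [] (false, c) = [] := by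
  unfold altStep
  dsimp only
  split_ifs with h1 h2
  · rfl
  · simp at h2
  · rfl

lemma regStep_off_false (filt : Bool) (r : Int × Int × Int → Bool) (c : List Int)
    (p : Int × Int × Int) (h : r p = false) : regStep filt r (false, c) p = false := by
  unfold regStep
  dsimp only
  split_ifs with h1 h2
  · exact h
  · exact h2.elim
  · simp [h]

lemma main_inv (filt : Bool) : ∀ (ins : List (Bool × List Int)) (clean : Bool),
    preAux filt ins clean = true →
    ∀ (S : List (List Int)) (L : List (Int × (Int × Int × Int × Int × Int × Int)))
      (r : Int × Int × Int → Bool),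
    S.Nodup → (∀ u ∈ S, shape6 u) → (∀ p, cnt S p = b2n (r p)) →
    (∀ sc ∈ L, boxpos sc.2) → (∀ p, sgn L p = b2i (r p)) →
    (clean = true → S = [] ∧ L = []) →
    (ins.foldl (stepA filt) S).Nodup ∧ (∀ u ∈ ins.foldl (stepA filt) S, shape6 u) ∧
    (∀ sc ∈ ins.foldl (altStep filt) L, boxpos sc.2) ∧
    (∀ p, (cnt (ins.foldl (stepA filt) S) p : Int) = sgn (ins.foldl (altStep filt) L) p) := by
  intro ins
  induction ins with
  | nil =>
    intro clean _ S L r h1 h2 h3 h4 h5 _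
    exact ⟨h1, h2, h4, fun p => by
      simp only [List.foldl_nil]
      rw [h3 p, h5 p]
      cases r p <;> simp [b2n, b2i]⟩
  | cons ic tl ih =>
    intro clean hpre S L r h1 h2 h3 h4 h5 hclean
    obtain ⟨is_on, c⟩ := ic
    simp only [preAux, Bool.and_eq_true] at hpre
    obtain ⟨hhead, htl⟩ := hpre
    simp only [List.foldl_cons]
    simp only [Bool.or_eq_true] at hhead
    rcases hhead with (hsk | hlen) | hoff
    · -- instruction is filtered out: both sides skip it
      rw [stepA_skip _ _ _ _ hsk, altStep_skip _ _ _ _ hsk]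
      apply ih _ htl S L r h1 h2 h3 h4 h5
      intro hcl
      rw [Bool.and_eq_true] at hcl
      exact hclean hcl.1
    · -- a well-formed 6-coordinate cube
      have h6 : c.length = 6 := by simpa using hlen
      obtain ⟨x0,x1,y0,y1,z0,z1, rfl⟩ := exists_six h6
      have hA := stepA_inv filt is_on x0 x1 y0 y1 z0 z1 S r h1 h2 h3
      have hB := stepB_inv filt is_on x0 x1 y0 y1 z0 z1 L r h4 h5
      apply ih _ htl _ _ (regStep filt r (is_on, [x0,x1,y0,y1,z0,z1]))
        hA.1 hA.2.1 hA.2.2 hB.1 hB.2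
      intro hcl
      rw [Bool.and_eq_true] at hcl
      obtain ⟨hS0, hL0⟩ := hclean hcl.1
      subst hS0; subst hL0
      rcases Bool.or_eq_true_iff.mp hcl.2 with hno | hskp
      · have his : is_on = false := by
          cases is_on
          · rfl
          · cases hno
        rw [his, stepA_off_empty, altStep_off_empty]
        exact ⟨rfl, rfl⟩
      · rw [stepA_skip _ _ _ _ hskp, altStep_skip _ _ _ _ hskp]
        exact ⟨rfl, rfl⟩
    · -- a turn-off instruction before any effective turn-on: both states are empty
      rw [Bool.and_eq_true, Bool.and_eq_true] at hoff
      have his : is_on = false := by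
        cases is_on
        · rfl
        · cases hoff.1.1
      obtain ⟨hS0, hL0⟩ := hclean hoff.1.2
      subst hS0; subst hL0
      rw [his, stepA_off_empty, altStep_off_empty]
      have hrf : ∀ p, r p = false := by
        intro p
        have := h3 p
        simp only [cnt, List.countP_nil] at this
        cases hr : r p
        · rfl
        · rw [hr] at this; simp [b2n] at this
      apply ih _ htl [] [] (regStep filt r (false, c)) List.nodup_nil
        (fun u hu => absurd hu (List.not_mem_nil))
        (fun p => by rw [regStep_off_false _ _ _ _ (hrf p)]; simp [cnt, b2n])
        (fun sc h => absurd h (List.not_mem_nil))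
        (fun p => by rw [regStep_off_false _ _ _ _ (hrf p)]; simp [sgn, b2i])
        (fun _ => ⟨rfl, rfl⟩)

-- ===== VERDICT (by name: the statement is the Claim_ definition above) =====
theorem track_cubes_spec : Claim_equal_track_cubes := by
  intro ins filt _ hpre
  unfold Spec_track_cubes
  unfold Pre_track_cubes at hpre
  have hmain := main_inv filt ins true hpre PySem.Set.empty [] (fun _ => false)
    List.nodup_nil (fun u hu => absurd hu (List.not_mem_nil))
    (fun p => by simp [cnt, b2n]) (fun sc h => absurd h (List.not_mem_nil))
    (fun p => by simp [sgn, b2i]) (fun _ => ⟨rfl, rfl⟩)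
  obtain ⟨hnd, hsh, hpos, hpt⟩ := hmain
  show track_cubes ins filt = track_cubes_alt ins filt
  have hL : track_cubes ins filt
      = ((ins.foldl (stepA filt) PySem.Set.empty).map volume).sum := rfl
  have hR : track_cubes_alt ins filt
      = ((ins.foldl (altStep filt) []).map (fun sc =>
          sc.1 * (sc.2.2.1 - sc.2.1) * (sc.2.2.2.2.1 - sc.2.2.2.1) *
            (sc.2.2.2.2.2.2 - sc.2.2.2.2.2.1))).sum := rfl
  rw [hL, hR]
  exact final_eq _ _ hsh hpos hpt
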